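-- pv_equiv track=rewrite | github.com/GitMonsters/octotetrahedral-agi | arc-puzzle-catalog/re-arc/solves/31550a8a/solver.py | find_blobs
-- ===== SOURCE A (Python) =====
-- from collections import deque
--
-- def find_blobs(grid):
--     rows = len(grid)
--     cols = len(grid[0])
--     bg = grid[0][0]
--     visited = [[False] * cols for _ in range(rows)]
--     blobs = []
--     for r in range(rows):
--         for c in range(cols):
--             if grid[r][c] != bg and not visited[r][c]:
--                 q = deque([(r, c)])
--                 visited[r][c] = True
--                 cells = [(r, c)]
--                 while q:
--                     cr, cc = q.popleft()
--                     for dr, dc in [(-1, 0), (1, 0), (0, -1), (0, 1)]: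
--                         nr, nc = cr + dr, cc + dc
--                         if (0 <= nr < rows and 0 <= nc < cols
--                                 and grid[nr][nc] != bg
--                                 and not visited[nr][nc]):
--                             visited[nr][nc] = True
--                             q.append((nr, nc))
--                             cells.append((nr, nc))
--                 min_r = min(p[0] for p in cells)
--                 max_r = max(p[0] for p in cells)
--                 min_c = min(p[1] for p in cells)
--                 max_c = max(p[1] for p in cells)
--                 blobs.append({
--                     "min_r": min_r, "max_r": max_r,
--                     "min_c": min_c, "max_c": max_c,
--                     "h": max_r - min_r + 1,
--                     "w": max_c - min_c + 1,
--                 })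
--     seen = set()
--     unique = []
--     for b in blobs:
--         key = (b["min_r"], b["max_r"], b["min_c"], b["max_c"])
--         if key not in seen:
--             seen.add(key)
--             unique.append(b)
--     return unique
-- ===== SOURCE B (Python) =====
-- def _relax(ok, labels, rows, cols, i):
--     # new label of cell i: min of its own label and its non-background 4-neighbours' labels
--     if not ok[i]:
--         return labels[i]
--     m = labels[i]
--     r, c = divmod(i, cols)
--     if r > 0 and ok[i - cols]:
--         m = min(m, labels[i - cols])
--     if r + 1 < rows and ok[i + cols]:
--         m = min(m, labels[i + cols])
--     if c > 0 and ok[i - 1]: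
--         m = min(m, labels[i - 1])
--     if c + 1 < cols and ok[i + 1]:
--         m = min(m, labels[i + 1])
--     return m
--
--
-- def find_blobs(grid):
--     rows = len(grid)
--     cols = len(grid[0])
--     bg = grid[0][0]
--     n = rows * cols
--     # connected-component labeling by synchronous min-label propagation:
--     # every non-background cell starts labeled with its row-major id; each round
--     # replaces a label by the min over the cell and its non-background neighbours;
--     # at the fixpoint the label of a cell is the smallest id in its component.
--     ok = [grid[i // cols][i % cols] != bg for i in range(n)]
--     labels = list(range(n))
--     changed = True
--     while changed:
--         new = [_relax(ok, labels, rows, cols, i) for i in range(n)]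
--         changed = new != labels
--         labels = new
--     # one row-major aggregation pass; a dict keyed by label keeps first-seen order,
--     # which is ascending component-minimum order (a component's min cell carries
--     # its own id as label and is the component's first cell in row-major order)
--     boxes = {}
--     for i in range(n):
--         if ok[i]:
--             r, c = divmod(i, cols)
--             b = boxes.get(labels[i])
--             if b is None:
--                 boxes[labels[i]] = (r, r, c, c)
--             else:
--                 boxes[labels[i]] = (min(b[0], r), max(b[1], r), min(b[2], c), max(b[3], c))
--     seen = set()
--     unique = []
--     for mnr, mxr, mnc, mxc in boxes.values():
--         key = (mnr, mxr, mnc, mxc)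
--         if key not in seen:
--             seen.add(key)
--             unique.append({"min_r": mnr, "max_r": mxr, "min_c": mnc, "max_c": mxc,
--                            "h": mxr - mnr + 1, "w": mxc - mnc + 1})
--     return unique
-- ===== Notes on version B (the rewrite author's own statement) =====
-- stated objective: alternative
-- what changed: Replaces BFS flood fill (deque, visited matrix, per-blob min/max scans) with connected-component labeling by synchronous min-label propagation to a fixpoint: every non-background cell starts labeled with its row-major id, rounds take the min over non-background 4-neighbours until stable, then one aggregation pass builds the bounding boxes per label in first-seen (= ascending component-minimum) order, followed by the same bbox dedup.
import Mathlib
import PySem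

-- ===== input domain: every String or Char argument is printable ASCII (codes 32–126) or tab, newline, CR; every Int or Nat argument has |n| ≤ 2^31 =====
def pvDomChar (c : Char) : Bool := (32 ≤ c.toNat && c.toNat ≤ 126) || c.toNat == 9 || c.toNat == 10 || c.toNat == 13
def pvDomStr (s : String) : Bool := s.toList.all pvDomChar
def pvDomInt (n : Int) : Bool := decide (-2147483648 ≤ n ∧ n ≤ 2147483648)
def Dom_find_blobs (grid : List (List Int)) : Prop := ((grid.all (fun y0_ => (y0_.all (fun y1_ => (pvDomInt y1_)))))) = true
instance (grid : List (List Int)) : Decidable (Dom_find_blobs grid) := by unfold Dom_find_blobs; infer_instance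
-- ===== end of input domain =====

-- B replaces A's BFS flood fill (deque, visited matrix, per-blob min()/max() scans, separate dedup
-- pass) by connected-component labeling via synchronous min-label propagation: every non-background
-- cell starts labeled with its row-major id, rounds take the min over non-background 4-neighbours
-- until a fixpoint, then one aggregation pass builds bounding boxes per label in first-seen
-- (= ascending component-minimum) order, followed by the same bbox dedup (objective: alternative).

-- ===== PORT A =====
-- grid[r][c]; evaluated only under the 0 ≤ r < rows / 0 ≤ c < cols guards (and Pre_), where it is exact
def pvCell (g : List (List Int)) (r c : Int) : Int := (g.getD r.toNat []).getD c.toNat 0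

def pvVGet (v : List (List Bool)) (r c : Int) : Bool := (v.getD r.toNat []).getD c.toNat false

def pvVSet (v : List (List Bool)) (r c : Int) : List (List Bool) :=
  v.modify r.toNat (fun row => row.set c.toNat true)

def pvDirs : List (Int × Int) := [(-1, 0), (1, 0), (0, -1), (0, 1)]

-- the `for dr, dc in …` body of A's BFS while-loop
def pvBfsStep (g : List (List Int)) (bg rows cols cr cc : Int)
    (st : List (List Bool) × List (Int × Int) × List (Int × Int)) (d : Int × Int) :
    List (List Bool) × List (Int × Int) × List (Int × Int) :=
  let nr := cr + d.1
  let nc := cc + d.2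
  if 0 ≤ nr ∧ nr < rows ∧ 0 ≤ nc ∧ nc < cols ∧ pvCell g nr nc ≠ bg ∧ pvVGet st.1 nr nc = false then
    (pvVSet st.1 nr nc, st.2.1 ++ [(nr, nc)], st.2.2 ++ [(nr, nc)])
  else st

def pvBfsExpand (g : List (List Int)) (bg rows cols cr cc : Int)
    (st : List (List Bool) × List (Int × Int) × List (Int × Int)) :
    List (List Bool) × List (Int × Int) × List (Int × Int) :=
  pvDirs.foldl (pvBfsStep g bg rows cols cr cc) st

-- A's `while q:` loop; fuel = rows*cols is a totality guard only (proved sufficient below)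
def pvBfsLoop (g : List (List Int)) (bg rows cols : Int) :
    Nat → List (Int × Int) → List (List Bool) → List (Int × Int) →
    List (List Bool) × List (Int × Int)
  | 0, _, vis, cells => (vis, cells)
  | _ + 1, [], vis, cells => (vis, cells)
  | fuel + 1, (cr, cc) :: rest, vis, cells =>
      let st := pvBfsExpand g bg rows cols cr cc (vis, rest, cells)
      pvBfsLoop g bg rows cols fuel st.2.1 st.1 st.2.2

-- Python min()/max() of a nonempty list ([] case unreachable: cells starts with the seed)
def pvMinL : List Int → Int
  | [] => 0
  | x :: xs => xs.foldl min x
def pvMaxL : List Int → Int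
  | [] => 0
  | x :: xs => xs.foldl max x

def pvBlob (mnr mxr mnc mxc : Int) : List (String × Int) :=
  [("min_r", mnr), ("max_r", mxr), ("min_c", mnc), ("max_c", mxc),
   ("h", mxr - mnr + 1), ("w", mxc - mnc + 1)]

-- body of A's `for c in range(cols):` loop
def pvScanCellA (grid : List (List Int)) (bg rows cols : Int) (fuel : Nat)
    (st : List (List Bool) × List (List (String × Int))) (r c : Int) :
    List (List Bool) × List (List (String × Int)) :=
  if pvCell grid r c ≠ bg ∧ pvVGet st.1 r c = false then
    let res := pvBfsLoop grid bg rows cols fuel [(r, c)] (pvVSet st.1 r c) [(r, c)]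
    (res.1, st.2 ++ [pvBlob (pvMinL (res.2.map (·.1))) (pvMaxL (res.2.map (·.1)))
                            (pvMinL (res.2.map (·.2))) (pvMaxL (res.2.map (·.2)))])
  else st

-- body of A's final dedup loop
def pvDedupStep (su : PySem.Set (Int × Int × Int × Int) × List (List (String × Int)))
    (b : List (String × Int)) :
    PySem.Set (Int × Int × Int × Int) × List (List (String × Int)) :=
  let d : PySem.Dict String Int := PySem.Dict.mk b
  let key := (d.getD "min_r" 0, d.getD "max_r" 0, d.getD "min_c" 0, d.getD "max_c" 0)
  if PySem.Set.contains su.1 key then su else (PySem.Set.add su.1 key, su.2 ++ [b])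

def find_blobs (grid : List (List Int)) : List (List (String × Int)) :=
  let rows : Int := grid.length
  let cols : Int := grid.headI.length        -- len(grid[0]); grid = [] is excluded by Pre_
  let bg := pvCell grid 0 0
  let fuel := grid.length * grid.headI.length
  let scan := (PySem.List.pyRange 0 rows 1).foldl (fun st r =>
      (PySem.List.pyRange 0 cols 1).foldl (fun st c => pvScanCellA grid bg rows cols fuel st r c) st)
    (List.replicate grid.length (List.replicate grid.headI.length false),
     ([] : List (List (String × Int))))
  (scan.2.foldl pvDedupStep ((PySem.Set.empty : PySem.Set (Int × Int × Int × Int)), [])).2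

-- ===== PORT B =====
-- ok[i] = grid[i // cols][i % cols] != bg for i in range(n) (indices are nonnegative, so
-- List.range / Nat division are exact for Python's range / //)
def pvOkArr (g : List (List Int)) (bg : Int) (n cols : Nat) : List Bool :=
  (List.range n).map (fun i => decide (pvCell g ((i / cols : Nat) : Int) ((i % cols : Nat) : Int) ≠ bg))

-- B's _relax: the four conditional mins, one helper per python statement, in python's order
def pvRelaxUp (ok : List Bool) (labels : List Int) (cols i : Nat) (m : Int) : Int :=
  if 0 < i / cols ∧ ok.getD (i - cols) false = true then min m (labels.getD (i - cols) 0) else m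
def pvRelaxDown (ok : List Bool) (labels : List Int) (rows cols i : Nat) (m : Int) : Int :=
  if i / cols + 1 < rows ∧ ok.getD (i + cols) false = true then min m (labels.getD (i + cols) 0) else m
def pvRelaxLeft (ok : List Bool) (labels : List Int) (cols i : Nat) (m : Int) : Int :=
  if 0 < i % cols ∧ ok.getD (i - 1) false = true then min m (labels.getD (i - 1) 0) else m
def pvRelaxRight (ok : List Bool) (labels : List Int) (cols i : Nat) (m : Int) : Int :=
  if i % cols + 1 < cols ∧ ok.getD (i + 1) false = true then min m (labels.getD (i + 1) 0) else m

def pvRelax (ok : List Bool) (labels : List Int) (rows cols : Nat) (i : Nat) : Int :=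
  if ok.getD i false = false then labels.getD i 0 else
  pvRelaxRight ok labels cols i (pvRelaxLeft ok labels cols i
    (pvRelaxDown ok labels rows cols i (pvRelaxUp ok labels cols i (labels.getD i 0))))

-- one synchronous round: new = [_relax(…, i) for i in range(n)]
def pvRoundB (ok : List Bool) (rows cols : Nat) (labels : List Int) : List Int :=
  (List.range (rows * cols)).map (pvRelax ok labels rows cols)

-- B's `while changed:` loop; fuel = n*n+1 is a totality guard only (proved sufficient below)
def pvIterB (ok : List Bool) (rows cols : Nat) : Nat → List Int → List Int
  | 0, l => l
  | fuel + 1, l =>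
      let l' := pvRoundB ok rows cols l
      if l' = l then l else pvIterB ok rows cols fuel l'

-- body of B's aggregation loop (dict keyed by label, first-seen order, box grown by min/max)
def pvAgg (ok : List Bool) (labels : List Int) (cols : Nat)
    (d : PySem.Dict Int (Int × Int × Int × Int)) (i : Nat) :
    PySem.Dict Int (Int × Int × Int × Int) :=
  if ok.getD i false then
    let r : Int := ((i / cols : Nat) : Int)
    let c : Int := ((i % cols : Nat) : Int)
    let v := labels.getD i 0
    match d.get? v with
    | none => d.insert v (r, r, c, c)
    | some b => d.insert v (min b.1 r, max b.2.1 r, min b.2.2.1 c, max b.2.2.2 c)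
  else d

-- body of B's final dedup loop (over the boxes dict's values)
def pvDedupStepB (su : PySem.Set (Int × Int × Int × Int) × List (List (String × Int)))
    (b : Int × Int × Int × Int) :
    PySem.Set (Int × Int × Int × Int) × List (List (String × Int)) :=
  if PySem.Set.contains su.1 b then su
  else (PySem.Set.add su.1 b, su.2 ++ [pvBlob b.1 b.2.1 b.2.2.1 b.2.2.2])

def find_blobs_alt (grid : List (List Int)) : List (List (String × Int)) :=
  let rows := grid.length
  let cols := grid.headI.length        -- len(grid[0]); grid = [] is excluded by Pre_
  let bg := pvCell grid 0 0
  let n := rows * cols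
  let ok := pvOkArr grid bg n cols
  let labels := pvIterB ok rows cols (n * n + 1) ((List.range n).map (fun (i : Nat) => (i : Int)))
  let boxes := (List.range n).foldl (pvAgg ok labels cols) PySem.Dict.empty
  (boxes.values.foldl pvDedupStepB ((PySem.Set.empty : PySem.Set (Int × Int × Int × Int)), [])).2

-- ===== PRECONDITION & SPEC =====
-- Pre_ excludes exactly the inputs where the Python A raises IndexError: the empty grid, an empty
-- first row (grid[0][0]), and grids with a row shorter than the first (the row-major scan indexes
-- every row at all columns 0..len(grid[0])-1).
def Pre_find_blobs (grid : List (List Int)) : Prop :=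
  grid ≠ [] ∧ grid.headI ≠ [] ∧ ∀ row ∈ grid, grid.headI.length ≤ row.length
instance (grid : List (List Int)) : Decidable (Pre_find_blobs grid) := by
  unfold Pre_find_blobs; infer_instance

def pvWitness_find_blobs : List (List Int) := [[0, 1], [1, 0]]

def Spec_find_blobs (grid : List (List Int)) (out : List (List (String × Int))) : Prop :=
  out = find_blobs_alt grid
instance (grid : List (List Int)) (out : List (List (String × Int))) :
    Decidable (Spec_find_blobs grid out) := by unfold Spec_find_blobs; infer_instance

-- ===== CLAIM (what is proved, stated in full; the proofs are below) =====
def Claim_equal_find_blobs : Prop :=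
  ∀ (grid : List (List Int)), Dom_find_blobs grid → Pre_find_blobs grid →
    Spec_find_blobs grid (find_blobs grid)

-- ===== LEMMAS AND PROOFS =====

def pvNbrs (cr cc : Int) : List (Int × Int) := [(cr - 1, cc), (cr + 1, cc), (cr, cc - 1), (cr, cc + 1)]

-- in-bounds predicate, the `ok`-cell predicate and the flood-fill step relations
def pvInb (rows cols : Int) (p : Int × Int) : Prop :=
  0 ≤ p.1 ∧ p.1 < rows ∧ 0 ≤ p.2 ∧ p.2 < cols

def pvOk (g : List (List Int)) (bg rows cols : Int) (p : Int × Int) : Prop :=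
  pvInb rows cols p ∧ pvCell g p.1 p.2 ≠ bg

def pvStepR (g : List (List Int)) (bg rows cols : Int) (V : Int × Int → Prop)
    (a b : Int × Int) : Prop :=
  b ∈ pvNbrs a.1 a.2 ∧ pvOk g bg rows cols b ∧ ¬ V b

-- visited-matrix abstraction (false outside the grid)
def pvAV (rows cols : Int) (vis : List (List Bool)) (p : Int × Int) : Prop :=
  pvInb rows cols p ∧ pvVGet vis p.1 p.2 = true

def pvShape (rn cn : Nat) (vis : List (List Bool)) : Prop :=
  vis.length = rn ∧ ∀ row ∈ vis, row.length = cn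

def pvAll (rn cn : Nat) : Finset (Int × Int) :=
  ((Finset.range rn).image (fun i : Nat => (i : Int))) ×ˢ ((Finset.range cn).image (fun i : Nat => (i : Int)))

def pvUnvisA (rn cn : Nat) (vis : List (List Bool)) : Nat :=
  ((pvAll rn cn).filter (fun p => pvVGet vis p.1 p.2 = false)).card

lemma mem_pvAll (rn cn : Nat) (p : Int × Int) : p ∈ pvAll rn cn ↔ pvInb rn cn p := by
  rcases p with ⟨x, y⟩
  simp only [pvAll, Finset.mem_product, Finset.mem_image, Finset.mem_range, pvInb]
  constructor
  · rintro ⟨⟨i, hi, rfl⟩, ⟨j, hj, rfl⟩⟩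
    refine ⟨by omega, by omega, by omega, by omega⟩
  · rintro ⟨h1, h2, h3, h4⟩
    exact ⟨⟨x.toNat, by omega, by omega⟩, ⟨y.toNat, by omega, by omega⟩⟩

lemma card_pvAll (rn cn : Nat) : (pvAll rn cn).card = rn * cn := by
  rw [pvAll, Finset.card_product, Finset.card_image_of_injective _ (fun a b h => by omega),
    Finset.card_image_of_injective _ (fun a b h => by omega), Finset.card_range, Finset.card_range]

lemma pvShape_vset (rn cn : Nat) (vis : List (List Bool)) (r c : Int)
    (h : pvShape rn cn vis) : pvShape rn cn (pvVSet vis r c) := by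
  refine ⟨by simp [pvVSet, h.1], ?_⟩
  intro row hrow
  rw [List.mem_iff_getElem] at hrow
  obtain ⟨j, hj, rfl⟩ := hrow
  simp only [pvVSet, List.length_modify] at hj
  simp only [pvVSet, List.getElem_modify]
  split
  · simp only [List.length_set]
    exact h.2 _ (List.getElem_mem hj)
  · exact h.2 _ (List.getElem_mem hj)

lemma pvVGet_vset (rn cn : Nat) (vis : List (List Bool)) (r c x y : Int)
    (hsh : pvShape rn cn vis) (hin : pvInb rn cn (r, c)) (hxy : pvInb rn cn (x, y)) :
    pvVGet (pvVSet vis r c) x y = if x = r ∧ y = c then true else pvVGet vis x y := by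
  obtain ⟨hlen, hrow⟩ := hsh
  obtain ⟨hr0, hr1, hc0, hc1⟩ := hin
  obtain ⟨hx0, hx1, hy0, hy1⟩ := hxy
  simp only at *
  have hxlt : x.toNat < vis.length := by omega
  have hrlt : r.toNat < vis.length := by omega
  simp only [pvVGet, pvVSet, List.getD_eq_getElem?_getD, List.getElem?_modify,
    List.getElem?_eq_getElem hxlt, Option.getD_some]
  by_cases hxr : x = r
  · subst hxr
    have hcl : c.toNat < (vis[x.toNat]).length := by
      rw [hrow _ (List.getElem_mem hxlt)]; omega
    by_cases hyc : y = c
    · subst hyc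
      simp [hcl]
    · have hne : c.toNat ≠ y.toNat := by omega
      simp [hne, hyc]
  · have hne : r.toNat ≠ x.toNat := by omega
    simp [hne, hxr]

lemma pvAV_vset (rn cn : Nat) (vis : List (List Bool)) (r c : Int)
    (h : pvShape rn cn vis) (hin : pvInb rn cn (r, c)) :
    ∀ p, pvAV rn cn (pvVSet vis r c) p ↔ pvAV rn cn vis p ∨ p = (r, c) := by
  rintro ⟨x, y⟩
  by_cases hxy : pvInb rn cn (x, y)
  · rw [pvAV, pvAV, pvVGet_vset rn cn vis r c x y h hin hxy]
    constructor
    · rintro ⟨-, hv⟩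
      by_cases hc : x = r ∧ y = c
      · right; simp [hc.1, hc.2]
      · rw [if_neg hc] at hv; exact Or.inl ⟨hxy, hv⟩
    · rintro (⟨-, hv⟩ | hp)
      · refine ⟨hxy, ?_⟩; split <;> simp [hv]
      · obtain ⟨rfl, rfl⟩ : x = r ∧ y = c := by simpa [Prod.ext_iff] using hp
        exact ⟨hxy, by simp⟩
  · constructor
    · rintro ⟨hi, -⟩; exact absurd hi hxy
    · rintro (⟨hi, -⟩ | hp)
      · exact absurd hi hxy
      · rw [hp] at hxy; exact absurd hin hxy

lemma pvUnvisA_vset (rn cn : Nat) (vis : List (List Bool)) (r c : Int)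
    (h : pvShape rn cn vis) (hin : pvInb rn cn (r, c)) (hf : pvVGet vis r c = false) :
    pvUnvisA rn cn (pvVSet vis r c) + 1 = pvUnvisA rn cn vis := by
  have hmem : (r, c) ∈ (pvAll rn cn).filter (fun p => pvVGet vis p.1 p.2 = false) := by
    simp [Finset.mem_filter, mem_pvAll, hin, hf]
  have hset : (pvAll rn cn).filter (fun p => pvVGet (pvVSet vis r c) p.1 p.2 = false) =
      ((pvAll rn cn).filter (fun p => pvVGet vis p.1 p.2 = false)).erase (r, c) := by
    ext q
    rcases q with ⟨x, y⟩
    simp only [Finset.mem_filter, Finset.mem_erase, mem_pvAll]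
    constructor
    · rintro ⟨hq, hv⟩
      rw [pvVGet_vset rn cn vis r c x y h hin hq] at hv
      by_cases hc : x = r ∧ y = c
      · rw [if_pos hc] at hv; simp at hv
      · rw [if_neg hc] at hv
        refine ⟨?_, hq, hv⟩
        simp only [Prod.mk.injEq, ne_eq]
        tauto
    · rintro ⟨hne, hq, hv⟩
      refine ⟨hq, ?_⟩
      rw [pvVGet_vset rn cn vis r c x y h hin hq, if_neg ?_]
      · exact hv
      · rintro ⟨rfl, rfl⟩; exact hne rfl
  have hpos : 0 < ((pvAll rn cn).filter (fun p => pvVGet vis p.1 p.2 = false)).card :=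
    Finset.card_pos.2 ⟨_, hmem⟩
  rw [pvUnvisA, pvUnvisA, hset, Finset.card_erase_of_mem hmem]
  omega

-- a reflexive-transitive chain survives strengthening the filter by a set N, or enters N
lemma pvRtg_strengthen (g : List (List Int)) (bg rows cols : Int)
    (V V' N : Int × Int → Prop) (hV' : ∀ y, V' y ↔ V y ∨ N y) {x p : Int × Int}
    (h : Relation.ReflTransGen (pvStepR g bg rows cols V) x p) :
    Relation.ReflTransGen (pvStepR g bg rows cols V') x p ∨
      ∃ n, N n ∧ Relation.ReflTransGen (pvStepR g bg rows cols V') n p := by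
  induction h with
  | refl => exact Or.inl Relation.ReflTransGen.refl
  | tail hab hbc ih =>
    rename_i b c
    by_cases hn : N c
    · exact Or.inr ⟨c, hn, Relation.ReflTransGen.refl⟩
    · have hstep : pvStepR g bg rows cols V' b c :=
        ⟨hbc.1, hbc.2.1, fun hv => by rcases (hV' c).1 hv with h | h
                                      exacts [hbc.2.2 h, hn h]⟩
      rcases ih with h | ⟨n, hn', hr⟩
      · exact Or.inl (h.tail hstep)
      · exact Or.inr ⟨n, hn', hr.tail hstep⟩

lemma pvRtg_congr (g : List (List Int)) (bg rows cols : Int) (V W : Int × Int → Prop)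
    (h : ∀ y, V y ↔ W y) {x p : Int × Int} :
    Relation.ReflTransGen (pvStepR g bg rows cols V) x p ↔
      Relation.ReflTransGen (pvStepR g bg rows cols W) x p := by
  constructor
  · exact Relation.ReflTransGen.mono fun a b hab => ⟨hab.1, hab.2.1, fun hw => hab.2.2 ((h b).2 hw)⟩
  · exact Relation.ReflTransGen.mono fun a b hab => ⟨hab.1, hab.2.1, fun hv => hab.2.2 ((h b).1 hv)⟩

-- the worklist step preserves the "visited ∪ reachable-from-worklist" set
lemma pvStep_char (g : List (List Int)) (bg rows cols : Int)
    (V V' N : Int × Int → Prop) (w₀ : Int × Int) (rest q' : List (Int × Int))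
    (hN : ∀ p, N p ↔ (p ∈ pvNbrs w₀.1 w₀.2 ∧ pvOk g bg rows cols p ∧ ¬ V p))
    (hV' : ∀ p, V' p ↔ V p ∨ N p)
    (hq' : ∀ p, p ∈ q' ↔ p ∈ rest ∨ N p)
    (hw : V w₀) :
    ∀ p, (V' p ∨ ∃ w ∈ q', Relation.ReflTransGen (pvStepR g bg rows cols V') w p) ↔
      (V p ∨ ∃ w ∈ w₀ :: rest, Relation.ReflTransGen (pvStepR g bg rows cols V) w p) := by
  intro p
  have hmono : ∀ {a b : Int × Int}, Relation.ReflTransGen (pvStepR g bg rows cols V') a b →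
      Relation.ReflTransGen (pvStepR g bg rows cols V) a b :=
    fun h => Relation.ReflTransGen.mono
      (fun a b hab => ⟨hab.1, hab.2.1, fun hv => hab.2.2 ((hV' b).2 (Or.inl hv))⟩) h
  constructor
  · rintro (hv' | ⟨w, hwq, hr⟩)
    · rcases (hV' p).1 hv' with hv | hn
      · exact Or.inl hv
      · obtain ⟨hnb, hok, hnv⟩ := (hN p).1 hn
        exact Or.inr ⟨w₀, List.mem_cons_self, Relation.ReflTransGen.single ⟨hnb, hok, hnv⟩⟩
    · rcases (hq' w).1 hwq with hwr | hwn
      · exact Or.inr ⟨w, List.mem_cons_of_mem _ hwr, hmono hr⟩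
      · obtain ⟨hnb, hok, hnv⟩ := (hN w).1 hwn
        exact Or.inr ⟨w₀, List.mem_cons_self, (Relation.ReflTransGen.single ⟨hnb, hok, hnv⟩).trans (hmono hr)⟩
  · rintro (hv | ⟨w, hwq, hr⟩)
    · exact Or.inl ((hV' p).2 (Or.inl hv))
    · rcases List.mem_cons.1 hwq with rfl | hwr
      · rcases Relation.ReflTransGen.cases_head hr with heq | ⟨c, hc, hcr⟩
        · exact Or.inl ((hV' p).2 (Or.inl (heq ▸ hw)))
        · have hnc : N c := (hN c).2 ⟨hc.1, hc.2.1, hc.2.2⟩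
          rcases pvRtg_strengthen g bg rows cols V V' N hV' hcr with hl | ⟨n, hn, hnr⟩
          · exact Or.inr ⟨c, (hq' c).2 (Or.inr hnc), hl⟩
          · exact Or.inr ⟨n, (hq' n).2 (Or.inr hn), hnr⟩
      · rcases pvRtg_strengthen g bg rows cols V V' N hV' hr with hl | ⟨n, hn, hnr⟩
        · exact Or.inr ⟨w, (hq' w).2 (Or.inl hwr), hl⟩
        · exact Or.inr ⟨n, (hq' n).2 (Or.inr hn), hnr⟩

lemma pvMem_nbrs (cr cc : Int) (p : Int × Int) :
    p ∈ pvNbrs cr cc ↔ ∃ d ∈ pvDirs, p = (cr + d.1, cc + d.2) := by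
  constructor
  · intro h
    simp only [pvNbrs, List.mem_cons, List.not_mem_nil, or_false] at h
    rcases h with rfl | rfl | rfl | rfl
    · exact ⟨(-1, 0), by simp [pvDirs], by simp [Prod.ext_iff]; try omega⟩
    · exact ⟨(1, 0), by simp [pvDirs], by simp; try omega⟩
    · exact ⟨(0, -1), by simp [pvDirs], by simp [Prod.ext_iff]; try omega⟩
    · exact ⟨(0, 1), by simp [pvDirs], by simp; try omega⟩
  · rintro ⟨d, hd, rfl⟩
    simp only [pvDirs, List.mem_cons, List.not_mem_nil, or_false] at hd
    rcases hd with rfl | rfl | rfl | rfl <;> (simp [pvNbrs, Prod.ext_iff]; try omega)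

lemma pvBfsExpandAux (g : List (List Int)) (bg : Int) (rn cn : Nat) (cr cc : Int) :
    ∀ (L : List (Int × Int)) (vis : List (List Bool)) (q cells : List (Int × Int)),
    pvShape rn cn vis →
    ∃ ext : List (Int × Int),
      (L.foldl (pvBfsStep g bg rn cn cr cc) (vis, q, cells)).2.1 = q ++ ext ∧
      (L.foldl (pvBfsStep g bg rn cn cr cc) (vis, q, cells)).2.2 = cells ++ ext ∧
      pvShape rn cn (L.foldl (pvBfsStep g bg rn cn cr cc) (vis, q, cells)).1 ∧
      (∀ p, pvAV rn cn (L.foldl (pvBfsStep g bg rn cn cr cc) (vis, q, cells)).1 p ↔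
        pvAV rn cn vis p ∨ p ∈ ext) ∧
      (∀ p, p ∈ ext ↔ ∃ d ∈ L, p = (cr + d.1, cc + d.2) ∧ pvOk g bg rn cn p ∧
        ¬ pvAV rn cn vis p) ∧
      pvUnvisA rn cn (L.foldl (pvBfsStep g bg rn cn cr cc) (vis, q, cells)).1 + ext.length =
        pvUnvisA rn cn vis := by
  intro L
  induction L with
  | nil =>
    intro vis q cells hsh
    exact ⟨[], by simp, by simp, hsh, by simp, by simp, by simp⟩
  | cons d L ih =>
    intro vis q cells hsh
    rw [List.foldl_cons]
    by_cases hc : 0 ≤ cr + d.1 ∧ cr + d.1 < (rn : Int) ∧ 0 ≤ cc + d.2 ∧ cc + d.2 < (cn : Int) ∧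
        pvCell g (cr + d.1) (cc + d.2) ≠ bg ∧ pvVGet vis (cr + d.1) (cc + d.2) = false
    · have hstep : pvBfsStep g bg rn cn cr cc (vis, q, cells) d =
          (pvVSet vis (cr + d.1) (cc + d.2), q ++ [(cr + d.1, cc + d.2)],
           cells ++ [(cr + d.1, cc + d.2)]) := by
        simp only [pvBfsStep]
        rw [if_pos hc]
      rw [hstep]
      have hinb : pvInb rn cn (cr + d.1, cc + d.2) := ⟨hc.1, hc.2.1, hc.2.2.1, hc.2.2.2.1⟩
      have hok : pvOk g bg rn cn (cr + d.1, cc + d.2) := ⟨hinb, hc.2.2.2.2.1⟩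
      have hnAV : ¬ pvAV rn cn vis (cr + d.1, cc + d.2) := by
        rintro ⟨-, hv⟩
        rw [hc.2.2.2.2.2] at hv
        exact Bool.false_ne_true hv
      have hAVv := pvAV_vset rn cn vis (cr + d.1) (cc + d.2) hsh hinb
      obtain ⟨ext, h1, h2, h3, h4, h5, h6⟩ :=
        ih (pvVSet vis (cr + d.1) (cc + d.2)) (q ++ [(cr + d.1, cc + d.2)])
          (cells ++ [(cr + d.1, cc + d.2)]) (pvShape_vset rn cn vis _ _ hsh)
      refine ⟨(cr + d.1, cc + d.2) :: ext, ?_, ?_, h3, ?_, ?_, ?_⟩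
      · rw [h1, List.append_assoc]; rfl
      · rw [h2, List.append_assoc]; rfl
      · intro p
        rw [h4 p, hAVv p, List.mem_cons]
        tauto
      · intro p
        constructor
        · intro hp
          rcases List.mem_cons.1 hp with rfl | hp'
          · exact ⟨d, List.mem_cons_self, rfl, hok, hnAV⟩
          · obtain ⟨d', hd', rfl, hok', hnAV'⟩ := (h5 p).1 hp'
            exact ⟨d', List.mem_cons_of_mem _ hd', rfl, hok',
              fun h => hnAV' ((hAVv _).2 (Or.inl h))⟩
        · rintro ⟨d', hd', rfl, hok', hnAV'⟩
          rcases List.mem_cons.1 hd' with rfl | hd''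
          · exact List.mem_cons_self
          · by_cases hpn : (cr + d'.1, cc + d'.2) = ((cr + d.1, cc + d.2) : Int × Int)
            · rw [hpn]; exact List.mem_cons_self
            · refine List.mem_cons_of_mem _ ((h5 _).2 ⟨d', hd'', rfl, hok', ?_⟩)
              intro h
              rcases (hAVv _).1 h with h' | h'
              · exact hnAV' h'
              · exact hpn h'
      · have hun := pvUnvisA_vset rn cn vis (cr + d.1) (cc + d.2) hsh hinb hc.2.2.2.2.2
        simp only [List.length_cons]
        omega
    · have hstep : pvBfsStep g bg rn cn cr cc (vis, q, cells) d = (vis, q, cells) := by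
        simp only [pvBfsStep]
        rw [if_neg hc]
      rw [hstep]
      obtain ⟨ext, h1, h2, h3, h4, h5, h6⟩ := ih vis q cells hsh
      refine ⟨ext, h1, h2, h3, h4, ?_, h6⟩
      intro p
      rw [h5 p]
      constructor
      · rintro ⟨d', hd', rfl, hok', hnAV'⟩
        exact ⟨d', List.mem_cons_of_mem _ hd', rfl, hok', hnAV'⟩
      · rintro ⟨d', hd', rfl, hok', hnAV'⟩
        rcases List.mem_cons.1 hd' with rfl | hd''
        · exfalso
          have hvf : pvVGet vis (cr + d'.1) (cc + d'.2) = false := by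
            have : pvVGet vis (cr + d'.1) (cc + d'.2) ≠ true := fun hv => hnAV' ⟨hok'.1, hv⟩
            simpa using this
          exact hc ⟨hok'.1.1, hok'.1.2.1, hok'.1.2.2.1, hok'.1.2.2.2, hok'.2, hvf⟩
        · exact ⟨d', hd'', rfl, hok', hnAV'⟩

-- A's neighbour fold, characterised
lemma pvBfsExpand_spec (g : List (List Int)) (bg : Int) (rn cn : Nat) (cr cc : Int)
    (vis : List (List Bool)) (q cells : List (Int × Int)) (hsh : pvShape rn cn vis) :
    ∃ ext : List (Int × Int),
      (pvBfsExpand g bg rn cn cr cc (vis, q, cells)).2.1 = q ++ ext ∧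
      (pvBfsExpand g bg rn cn cr cc (vis, q, cells)).2.2 = cells ++ ext ∧
      pvShape rn cn (pvBfsExpand g bg rn cn cr cc (vis, q, cells)).1 ∧
      (∀ p, pvAV rn cn (pvBfsExpand g bg rn cn cr cc (vis, q, cells)).1 p ↔
        pvAV rn cn vis p ∨ p ∈ ext) ∧
      (∀ p, p ∈ ext ↔ (p ∈ pvNbrs cr cc ∧ pvOk g bg rn cn p ∧ ¬ pvAV rn cn vis p)) ∧
      pvUnvisA rn cn (pvBfsExpand g bg rn cn cr cc (vis, q, cells)).1 + ext.length =
        pvUnvisA rn cn vis := by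
  obtain ⟨ext, h1, h2, h3, h4, h5, h6⟩ :=
    pvBfsExpandAux g bg rn cn cr cc pvDirs vis q cells hsh
  refine ⟨ext, h1, h2, h3, h4, ?_, h6⟩
  intro p
  rw [h5 p, pvMem_nbrs]
  constructor
  · rintro ⟨d, hd, rfl, hok, hn⟩
    exact ⟨⟨d, hd, rfl⟩, hok, hn⟩
  · rintro ⟨⟨d, hd, rfl⟩, hok, hn⟩
    exact ⟨d, hd, rfl, hok, hn⟩

-- A's while-loop, characterised
lemma pvBfsLoop_spec (g : List (List Int)) (bg : Int) (rn cn : Nat) :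
    ∀ (fuel : Nat) (q : List (Int × Int)) (vis : List (List Bool)) (cells : List (Int × Int)),
    pvShape rn cn vis → (∀ w ∈ q, pvAV rn cn vis w) →
    pvUnvisA rn cn vis + q.length ≤ fuel →
    pvShape rn cn (pvBfsLoop g bg rn cn fuel q vis cells).1 ∧
    (∀ p, pvAV rn cn (pvBfsLoop g bg rn cn fuel q vis cells).1 p ↔
      pvAV rn cn vis p ∨
        ∃ w ∈ q, Relation.ReflTransGen (pvStepR g bg rn cn (pvAV rn cn vis)) w p) ∧
    ∃ ext : List (Int × Int),
      (pvBfsLoop g bg rn cn fuel q vis cells).2 = cells ++ ext ∧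
      (∀ p, p ∈ ext ↔ pvAV rn cn (pvBfsLoop g bg rn cn fuel q vis cells).1 p ∧
        ¬ pvAV rn cn vis p) := by
  intro fuel
  induction fuel with
  | zero =>
    intro q vis cells hsh hq hm
    have hq0 : q = [] := by
      cases q with
      | nil => rfl
      | cons a t => simp at hm
    subst hq0
    refine ⟨hsh, ?_, [], by simp [pvBfsLoop], by simp [pvBfsLoop]⟩
    intro p
    simp [pvBfsLoop]
  | succ fuel ih =>
    intro q vis cells hsh hq hm
    cases q with
    | nil =>
      refine ⟨hsh, ?_, [], by simp [pvBfsLoop], by simp [pvBfsLoop]⟩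
      intro p
      simp [pvBfsLoop]
    | cons w rest =>
      obtain ⟨cr, cc⟩ := w
      simp only [pvBfsLoop]
      obtain ⟨ext₀, h1, h2, h3, h4, h5, h6⟩ :=
        pvBfsExpand_spec g bg rn cn cr cc vis rest cells hsh
      have hq' : ∀ w' ∈ (pvBfsExpand g bg rn cn cr cc (vis, rest, cells)).2.1,
          pvAV rn cn (pvBfsExpand g bg rn cn cr cc (vis, rest, cells)).1 w' := by
        intro w' hw'
        rw [h1, List.mem_append] at hw'
        rcases hw' with hw' | hw'
        · exact (h4 w').2 (Or.inl (hq w' (List.mem_cons_of_mem _ hw')))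
        · exact (h4 w').2 (Or.inr hw')
      have hm' : pvUnvisA rn cn (pvBfsExpand g bg rn cn cr cc (vis, rest, cells)).1 +
          (pvBfsExpand g bg rn cn cr cc (vis, rest, cells)).2.1.length ≤ fuel := by
        rw [h1, List.length_append]
        simp only [List.length_cons] at hm
        omega
      obtain ⟨ihsh, ihchar, ext₁, i1, i2⟩ :=
        ih (pvBfsExpand g bg rn cn cr cc (vis, rest, cells)).2.1
          (pvBfsExpand g bg rn cn cr cc (vis, rest, cells)).1
          (pvBfsExpand g bg rn cn cr cc (vis, rest, cells)).2.2 h3 hq' hm'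
      have hmono01 : ∀ p, pvAV rn cn vis p →
          pvAV rn cn (pvBfsExpand g bg rn cn cr cc (vis, rest, cells)).1 p :=
        fun p h => (h4 p).2 (Or.inl h)
      refine ⟨ihsh, ?_, ext₀ ++ ext₁, ?_, ?_⟩
      · intro p
        rw [ihchar p]
        refine pvStep_char g bg rn cn (pvAV rn cn vis)
          (pvAV rn cn (pvBfsExpand g bg rn cn cr cc (vis, rest, cells)).1) (· ∈ ext₀)
          (cr, cc) rest (pvBfsExpand g bg rn cn cr cc (vis, rest, cells)).2.1
          h5 h4 ?_ (hq _ List.mem_cons_self) p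
        intro p'
        rw [h1, List.mem_append]
      · rw [i1, h2, List.append_assoc]
      · intro p
        rw [List.mem_append]
        constructor
        · rintro (h0 | h1')
          · refine ⟨(ihchar p).2 (Or.inl ((h4 p).2 (Or.inr h0))), ((h5 p).1 h0).2.2⟩
          · obtain ⟨hres, hn1⟩ := (i2 p).1 h1'
            exact ⟨hres, fun h => hn1 (hmono01 p h)⟩
        · rintro ⟨hres, hnv⟩
          by_cases hmid : pvAV rn cn (pvBfsExpand g bg rn cn cr cc (vis, rest, cells)).1 p
          · rcases (h4 p).1 hmid with h | h
            · exact absurd h hnv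
            · exact Or.inl h
          · exact Or.inr ((i2 p).2 ⟨hres, hmid⟩)

lemma pvVGet_replicate (rn cn : Nat) (x y : Int) :
    pvVGet (List.replicate rn (List.replicate cn false)) x y = false := by
  simp only [pvVGet, List.getD_eq_getElem?_getD, List.getElem?_replicate]
  split_ifs <;> simp [List.getElem?_replicate]
  split_ifs <;> simp


-- ===== row-major ids and the component relation =====
def pvCellOf (cn i : Nat) : Int × Int := (((i / cn : Nat) : Int), ((i % cn : Nat) : Int))
def pvIdN (cn : Nat) (p : Int × Int) : Nat := p.1.toNat * cn + p.2.toNat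
def pvRowI (cn i : Nat) : Int := ((i / cn : Nat) : Int)
def pvColI (cn i : Nat) : Int := ((i % cn : Nat) : Int)

lemma pvDivmod_unique (cn q r : Nat) (h : r < cn) :
    (q * cn + r) / cn = q ∧ (q * cn + r) % cn = r := by
  have hcn : 0 < cn := lt_of_le_of_lt (Nat.zero_le _) h
  constructor
  · rw [Nat.add_comm, Nat.add_mul_div_right _ _ hcn, Nat.div_eq_of_lt h, Nat.zero_add]
  · rw [Nat.add_comm, Nat.mul_comm, Nat.add_mul_mod_self_left, Nat.mod_eq_of_lt h]

lemma pvCellOf_inb (rn cn : Nat) (hcn : 0 < cn) (i : Nat) (hi : i < rn * cn) :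
    pvInb rn cn (pvCellOf cn i) := by
  have h1 : i / cn < rn := (Nat.div_lt_iff_lt_mul hcn).2 hi
  have h2 : i % cn < cn := Nat.mod_lt _ hcn
  unfold pvInb pvCellOf
  refine ⟨Int.natCast_nonneg _, ?_, Int.natCast_nonneg _, ?_⟩
  · show ((i / cn : Nat) : Int) < (rn : Int)
    exact_mod_cast h1
  · show ((i % cn : Nat) : Int) < (cn : Int)
    exact_mod_cast h2

lemma pvIdN_cellOf (cn i : Nat) : pvIdN cn (pvCellOf cn i) = i := by
  simp only [pvIdN, pvCellOf, Int.toNat_natCast]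
  exact Nat.div_add_mod' i cn

lemma pvCellOf_idN (rn cn : Nat) (p : Int × Int) (hp : pvInb rn cn p) :
    pvCellOf cn (pvIdN cn p) = p ∧ pvIdN cn p < rn * cn := by
  obtain ⟨x, y⟩ := p
  obtain ⟨h1, h2, h3, h4⟩ := hp
  simp only at h1 h2 h3 h4
  have hb : y.toNat < cn := by omega
  have hd := pvDivmod_unique cn x.toNat y.toNat hb
  constructor
  · show pvCellOf cn (x.toNat * cn + y.toNat) = (x, y)
    simp only [pvCellOf, hd.1, hd.2, Prod.mk.injEq]
    omega
  · show x.toNat * cn + y.toNat < rn * cn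
    have hx : x.toNat + 1 ≤ rn := by omega
    calc x.toNat * cn + y.toNat < x.toNat * cn + cn := by omega
      _ = (x.toNat + 1) * cn := by ring
      _ ≤ rn * cn := Nat.mul_le_mul_right _ hx

def pvAdjI (cn i j : Nat) : Prop :=
  j + cn = i ∨ i + cn = j ∨ (j + 1 = i ∧ 0 < i % cn) ∨ (i + 1 = j ∧ 0 < j % cn)

lemma pvAdjI_symm (cn i j : Nat) : pvAdjI cn i j ↔ pvAdjI cn j i := by
  unfold pvAdjI; tauto

lemma pvAdj_iff (rn cn : Nat) (hcn : 0 < cn) {i j : Nat} (hi : i < rn * cn) (hj : j < rn * cn) :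
    (pvCellOf cn j ∈ pvNbrs (pvCellOf cn i).1 (pvCellOf cn i).2) ↔ pvAdjI cn i j := by
  have hdi := Nat.div_add_mod' i cn
  have hdj := Nat.div_add_mod' j cn
  have hmi := Nat.mod_lt i hcn
  have hmj := Nat.mod_lt j hcn
  simp only [pvCellOf, pvNbrs, List.mem_cons, List.not_mem_nil, or_false, Prod.mk.injEq]
  constructor
  · rintro (⟨ha, hb⟩ | ⟨ha, hb⟩ | ⟨ha, hb⟩ | ⟨ha, hb⟩)
    · left
      have e1 : j / cn + 1 = i / cn := by omega
      have e2 : j % cn = i % cn := by omega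
      have h2 : i / cn * cn = j / cn * cn + cn := by rw [← e1]; ring
      omega
    · right; left
      have e1 : i / cn + 1 = j / cn := by omega
      have e2 : j % cn = i % cn := by omega
      have h2 : j / cn * cn = i / cn * cn + cn := by rw [← e1]; ring
      omega
    · right; right; left
      have e1 : j / cn = i / cn := by omega
      have e2 : j % cn + 1 = i % cn := by omega
      have h2 : i / cn * cn = j / cn * cn := by rw [e1]
      omega
    · right; right; right
      have e1 : j / cn = i / cn := by omega
      have e2 : j % cn = i % cn + 1 := by omega
      have h2 : i / cn * cn = j / cn * cn := by rw [e1]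
      omega
  · rintro (hij | hij | ⟨hij, hm⟩ | ⟨hij, hm⟩)
    · left
      have h2 : (j / cn + 1) * cn = j / cn * cn + cn := by ring
      have hi' : i = (j / cn + 1) * cn + j % cn := by omega
      obtain ⟨d1, d2⟩ := pvDivmod_unique cn (j / cn + 1) (j % cn) hmj
      rw [← hi'] at d1 d2
      omega
    · right; left
      have h2 : (i / cn + 1) * cn = i / cn * cn + cn := by ring
      have hj' : j = (i / cn + 1) * cn + i % cn := by omega
      obtain ⟨d1, d2⟩ := pvDivmod_unique cn (i / cn + 1) (i % cn) hmi
      rw [← hj'] at d1 d2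
      omega
    · right; right; left
      by_cases hcase : j % cn + 1 < cn
      · have hi' : i = j / cn * cn + (j % cn + 1) := by omega
        obtain ⟨d1, d2⟩ := pvDivmod_unique cn (j / cn) (j % cn + 1) hcase
        rw [← hi'] at d1 d2
        omega
      · exfalso
        have hcc : j % cn + 1 = cn := by omega
        have h2 : (j / cn + 1) * cn = j / cn * cn + cn := by ring
        have hi' : i = (j / cn + 1) * cn + 0 := by omega
        obtain ⟨d1, d2⟩ := pvDivmod_unique cn (j / cn + 1) 0 hcn
        rw [← hi'] at d2
        omega
    · right; right; right
      by_cases hcase : i % cn + 1 < cn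
      · have hj' : j = i / cn * cn + (i % cn + 1) := by omega
        obtain ⟨d1, d2⟩ := pvDivmod_unique cn (i / cn) (i % cn + 1) hcase
        rw [← hj'] at d1 d2
        omega
      · exfalso
        have hcc : i % cn + 1 = cn := by omega
        have h2 : (i / cn + 1) * cn = i / cn * cn + cn := by ring
        have hj' : j = (i / cn + 1) * cn + 0 := by omega
        obtain ⟨d1, d2⟩ := pvDivmod_unique cn (i / cn + 1) 0 hcn
        rw [← hj'] at d2
        omega

def pvOkI (g : List (List Int)) (bg : Int) (rn cn : Nat) (i : Nat) : Prop :=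
  i < rn * cn ∧ pvOk g bg rn cn (pvCellOf cn i)

def pvStepI (g : List (List Int)) (bg : Int) (rn cn : Nat) (a b : Nat) : Prop :=
  pvAdjI cn a b ∧ pvOkI g bg rn cn b

def pvConnI (g : List (List Int)) (bg : Int) (rn cn : Nat) : Nat → Nat → Prop :=
  Relation.ReflTransGen (pvStepI g bg rn cn)

def pvRepI (g : List (List Int)) (bg : Int) (rn cn : Nat) (v i : Nat) : Prop :=
  pvConnI g bg rn cn i v ∧ ∀ j, pvConnI g bg rn cn i j → v ≤ j

lemma pvConnI_ok (g : List (List Int)) (bg : Int) (rn cn : Nat) {i j : Nat}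
    (hok : pvOkI g bg rn cn i) (h : pvConnI g bg rn cn i j) : pvOkI g bg rn cn j := by
  induction h with
  | refl => exact hok
  | tail _ hbc _ => exact hbc.2

lemma pvConnI_symm (g : List (List Int)) (bg : Int) (rn cn : Nat) {i j : Nat}
    (hok : pvOkI g bg rn cn i) (h : pvConnI g bg rn cn i j) : pvConnI g bg rn cn j i := by
  induction h with
  | refl => exact Relation.ReflTransGen.refl
  | tail hab hbc ih =>
    exact Relation.ReflTransGen.head ⟨(pvAdjI_symm _ _ _).1 hbc.1, pvConnI_ok g bg rn cn hok hab⟩ ih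

lemma pvRepI_exists (g : List (List Int)) (bg : Int) (rn cn : Nat) {i : Nat}
    (hok : pvOkI g bg rn cn i) : ∃ v, pvRepI g bg rn cn v i := by
  suffices h : ∀ k, pvConnI g bg rn cn i k → ∃ v, pvRepI g bg rn cn v i from
    h i Relation.ReflTransGen.refl
  intro k
  induction k using Nat.strong_induction_on with
  | _ k ih =>
    intro hk
    by_cases hall : ∀ j, pvConnI g bg rn cn i j → k ≤ j
    · exact ⟨k, hk, hall⟩
    · push_neg at hall
      obtain ⟨j, hj, hjk⟩ := hall
      exact ih j hjk hj

lemma pvRepI_unique (g : List (List Int)) (bg : Int) (rn cn : Nat) {v w i : Nat}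
    (h1 : pvRepI g bg rn cn v i) (h2 : pvRepI g bg rn cn w i) : v = w :=
  Nat.le_antisymm (h1.2 w h2.1) (h2.2 v h1.1)

lemma pvRepI_le_self (g : List (List Int)) (bg : Int) (rn cn : Nat) {v i : Nat}
    (h : pvRepI g bg rn cn v i) : v ≤ i :=
  h.2 i Relation.ReflTransGen.refl

lemma pvRepI_congr (g : List (List Int)) (bg : Int) (rn cn : Nat) {i j : Nat}
    (hok : pvOkI g bg rn cn i) (hc : pvConnI g bg rn cn i j) (v : Nat) :
    pvRepI g bg rn cn v i ↔ pvRepI g bg rn cn v j := by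
  have hji := pvConnI_symm g bg rn cn hok hc
  constructor
  · rintro ⟨hv, hmin⟩
    exact ⟨hji.trans hv, fun k hk => hmin k (hc.trans hk)⟩
  · rintro ⟨hv, hmin⟩
    exact ⟨hc.trans hv, fun k hk => hmin k (hji.trans hk)⟩

lemma pvRepI_self (g : List (List Int)) (bg : Int) (rn cn : Nat) {v i : Nat}
    (hok : pvOkI g bg rn cn i) (h : pvRepI g bg rn cn v i) : pvRepI g bg rn cn v v :=
  (pvRepI_congr g bg rn cn hok h.1 v).1 h

lemma pvRep_iff_conn (g : List (List Int)) (bg : Int) (rn cn : Nat) {v j : Nat}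
    (hokv : pvOkI g bg rn cn v) (hv : pvRepI g bg rn cn v v) (hokj : pvOkI g bg rn cn j) :
    pvRepI g bg rn cn v j ↔ pvConnI g bg rn cn v j := by
  constructor
  · intro h
    exact pvConnI_symm g bg rn cn hokj h.1
  · intro h
    exact (pvRepI_congr g bg rn cn hokv h v).1 hv

-- ===== cell-level component relation (what A's BFS explores) =====
def pvStepC (g : List (List Int)) (bg rows cols : Int) (a b : Int × Int) : Prop :=
  b ∈ pvNbrs a.1 a.2 ∧ pvOk g bg rows cols b

def pvConnC (g : List (List Int)) (bg rows cols : Int) : Int × Int → Int × Int → Prop :=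
  Relation.ReflTransGen (pvStepC g bg rows cols)

lemma pvNbrs_symm (p q : Int × Int) : q ∈ pvNbrs p.1 p.2 ↔ p ∈ pvNbrs q.1 q.2 := by
  obtain ⟨a, b⟩ := p
  obtain ⟨c, d⟩ := q
  simp only [pvNbrs, List.mem_cons, List.not_mem_nil, or_false, Prod.mk.injEq]
  omega

lemma pvConnC_ok (g : List (List Int)) (bg rows cols : Int) {p q : Int × Int}
    (hok : pvOk g bg rows cols p) (h : pvConnC g bg rows cols p q) : pvOk g bg rows cols q := by
  induction h with
  | refl => exact hok
  | tail _ hbc _ => exact hbc.2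

lemma pvConnC_symm (g : List (List Int)) (bg rows cols : Int) {p q : Int × Int}
    (hok : pvOk g bg rows cols p) (h : pvConnC g bg rows cols p q) : pvConnC g bg rows cols q p := by
  induction h with
  | refl => exact Relation.ReflTransGen.refl
  | tail hab hbc ih =>
    exact Relation.ReflTransGen.head ⟨(pvNbrs_symm _ _).1 hbc.1, pvConnC_ok g bg rows cols hok hab⟩ ih

lemma pvConnI_iff_connC (g : List (List Int)) (bg : Int) (rn cn : Nat) (hcn : 0 < cn) {i j : Nat}
    (hok : pvOkI g bg rn cn i) (hj : j < rn * cn) :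
    pvConnI g bg rn cn i j ↔ pvConnC g bg rn cn (pvCellOf cn i) (pvCellOf cn j) := by
  constructor
  · intro h
    induction h with
    | refl => exact Relation.ReflTransGen.refl
    | tail hab hbc ih =>
      rename_i b c
      have hokb : pvOkI g bg rn cn b := pvConnI_ok g bg rn cn hok hab
      exact Relation.ReflTransGen.tail (ih hokb.1)
        ⟨(pvAdj_iff rn cn hcn hokb.1 hbc.2.1).2 hbc.1, hbc.2.2⟩
  · intro h
    have hcell : ∀ q, pvConnC g bg rn cn (pvCellOf cn i) q → pvOk g bg rn cn q →
        pvConnI g bg rn cn i (pvIdN cn q) := by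
      intro q hq
      induction hq with
      | refl =>
        intro _
        rw [pvIdN_cellOf]
        exact Relation.ReflTransGen.refl
      | tail hab hbc ih =>
        rename_i b c
        intro hokc
        have hokb : pvOk g bg rn cn b := pvConnC_ok g bg rn cn hok.2 hab
        obtain ⟨hbeq, hblt⟩ := pvCellOf_idN rn cn b hokb.1
        obtain ⟨hceq, hclt⟩ := pvCellOf_idN rn cn c hokc.1
        refine Relation.ReflTransGen.tail (ih hokb) ⟨?_, hclt, by rwa [hceq]⟩
        rw [← pvAdj_iff rn cn hcn hblt hclt, hbeq, hceq]
        exact hbc.1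
    by_cases hokj : pvOk g bg rn cn (pvCellOf cn j)
    · have := hcell (pvCellOf cn j) h hokj
      rwa [pvIdN_cellOf] at this
    · -- the chain's target is ok unless it never moved; then cellOf i = cellOf j, so i = j
      rcases (Relation.ReflTransGen.cases_head h) with heq | ⟨c, hc, hcr⟩
      · have : i = j := by
          have := congrArg (pvIdN cn) heq
          rwa [pvIdN_cellOf, pvIdN_cellOf] at this
        rw [this]
        exact Relation.ReflTransGen.refl
      · exfalso
        have hokc : pvOk g bg rn cn c := hc.2
        exact hokj (pvConnC_ok g bg rn cn hokc hcr)

-- ===== one BFS flood fill from a fresh seed reaches exactly the seed's component =====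
lemma pvV_closed_rtg (g : List (List Int)) (bg rows cols : Int) (V : Int × Int → Prop)
    (hVcl : ∀ p q, V p → pvStepC g bg rows cols p q → V q) {p q : Int × Int}
    (hp : V p) (h : pvConnC g bg rows cols p q) : V q := by
  induction h with
  | refl => exact hp
  | tail hab hbc ih => exact hVcl _ _ ih hbc

lemma pvReach_component (g : List (List Int)) (bg : Int) (rn cn : Nat) (V : Int × Int → Prop)
    (s : Int × Int) (hs : pvOk g bg rn cn s) (hsV : ¬ V s)
    (hVcl : ∀ p q, V p → pvStepC g bg rn cn p q → V q) :
    ∀ p, (p = s ∨ Relation.ReflTransGen (pvStepR g bg rn cn (fun x => V x ∨ x = s)) s p) ↔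
      pvConnC g bg rn cn s p := by
  intro p
  constructor
  · rintro (rfl | h)
    · exact Relation.ReflTransGen.refl
    · exact Relation.ReflTransGen.mono (fun a b hab => ⟨hab.1, hab.2.1⟩) h
  · intro h
    induction h with
    | refl => exact Or.inl rfl
    | tail hab hbc ih =>
      rename_i b c
      by_cases hcs : c = s
      · exact Or.inl hcs
      · have hsb : pvConnC g bg rn cn s c := Relation.ReflTransGen.tail hab hbc
        have hnVc : ¬ V c := by
          intro hVc
          exact hsV (pvV_closed_rtg g bg rn cn V hVcl hVc
            (pvConnC_symm g bg rn cn hs hsb))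
        have hstep : pvStepR g bg rn cn (fun x => V x ∨ x = s) b c :=
          ⟨hbc.1, hbc.2, by rintro (h | h); exacts [hnVc h, hcs h]⟩
        rcases ih with rfl | hreach
        · exact Or.inr (Relation.ReflTransGen.single hstep)
        · exact Or.inr (hreach.tail hstep)

-- ===== extrema of member-equal nonempty lists =====
lemma pvMinL_congr {l₁ l₂ : List Int} (h₁ : l₁ ≠ []) (h₂ : l₂ ≠ [])
    (h : ∀ x, x ∈ l₁ ↔ x ∈ l₂) : pvMinL l₁ = pvMinL l₂ := by
  obtain ⟨a, as, rfl⟩ := List.exists_cons_of_ne_nil h₁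
  obtain ⟨b, bs, rfl⟩ := List.exists_cons_of_ne_nil h₂
  show as.foldl min a = bs.foldl min b
  have lb₁ : ∀ y ∈ a :: as, as.foldl min a ≤ y := by
    intro y hy
    rcases List.mem_cons.1 hy with heq | hy
    · rw [heq]; exact (PySem.List.foldl_min_le as a).1
    · exact (PySem.List.foldl_min_le as a).2 y hy
  have lb₂ : ∀ y ∈ b :: bs, bs.foldl min b ≤ y := by
    intro y hy
    rcases List.mem_cons.1 hy with heq | hy
    · rw [heq]; exact (PySem.List.foldl_min_le bs b).1
    · exact (PySem.List.foldl_min_le bs b).2 y hy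
  have m₁ : as.foldl min a ∈ a :: as := by
    rcases PySem.List.foldl_min_mem as a with he | he
    · rw [he]; exact List.mem_cons_self
    · exact List.mem_cons_of_mem _ he
  have m₂ : bs.foldl min b ∈ b :: bs := by
    rcases PySem.List.foldl_min_mem bs b with he | he
    · rw [he]; exact List.mem_cons_self
    · exact List.mem_cons_of_mem _ he
  exact le_antisymm (lb₁ _ ((h _).2 m₂)) (lb₂ _ ((h _).1 m₁))

lemma pvMaxL_congr {l₁ l₂ : List Int} (h₁ : l₁ ≠ []) (h₂ : l₂ ≠ [])
    (h : ∀ x, x ∈ l₁ ↔ x ∈ l₂) : pvMaxL l₁ = pvMaxL l₂ := by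
  obtain ⟨a, as, rfl⟩ := List.exists_cons_of_ne_nil h₁
  obtain ⟨b, bs, rfl⟩ := List.exists_cons_of_ne_nil h₂
  show as.foldl max a = bs.foldl max b
  have ub₁ : ∀ y ∈ a :: as, y ≤ as.foldl max a := by
    intro y hy
    rcases List.mem_cons.1 hy with heq | hy
    · rw [heq]; exact (PySem.List.le_foldl_max as a).1
    · exact (PySem.List.le_foldl_max as a).2 y hy
  have ub₂ : ∀ y ∈ b :: bs, y ≤ bs.foldl max b := by
    intro y hy
    rcases List.mem_cons.1 hy with heq | hy
    · rw [heq]; exact (PySem.List.le_foldl_max bs b).1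
    · exact (PySem.List.le_foldl_max bs b).2 y hy
  have m₁ : as.foldl max a ∈ a :: as := by
    rcases PySem.List.foldl_max_mem as a with he | he
    · rw [he]; exact List.mem_cons_self
    · exact List.mem_cons_of_mem _ he
  have m₂ : bs.foldl max b ∈ b :: bs := by
    rcases PySem.List.foldl_max_mem bs b with he | he
    · rw [he]; exact List.mem_cons_self
    · exact List.mem_cons_of_mem _ he
  exact le_antisymm (ub₂ _ ((h _).1 m₁)) (ub₁ _ ((h _).2 m₂))

lemma pvMinL_append_singleton {l : List Int} (h : l ≠ []) (y : Int) :
    pvMinL (l ++ [y]) = min (pvMinL l) y := by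
  obtain ⟨a, as, rfl⟩ := List.exists_cons_of_ne_nil h
  show (as ++ [y]).foldl min a = min (as.foldl min a) y
  rw [List.foldl_append]
  rfl

lemma pvMaxL_append_singleton {l : List Int} (h : l ≠ []) (y : Int) :
    pvMaxL (l ++ [y]) = max (pvMaxL l) y := by
  obtain ⟨a, as, rfl⟩ := List.exists_cons_of_ne_nil h
  show (as ++ [y]).foldl max a = max (as.foldl max a) y
  rw [List.foldl_append]
  rfl

-- strictly sorted lists with equal membership are equal
lemma pvSortedLT_ext : ∀ {l₁ l₂ : List Nat}, l₁.Pairwise (· < ·) → l₂.Pairwise (· < ·) →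
    (∀ x, x ∈ l₁ ↔ x ∈ l₂) → l₁ = l₂ := by
  intro l₁
  induction l₁ with
  | nil =>
    intro l₂ _ _ h
    cases l₂ with
    | nil => rfl
    | cons b bs => exact absurd ((h b).2 List.mem_cons_self) (List.not_mem_nil)
  | cons a as ih =>
    intro l₂ h₁ h₂ h
    cases l₂ with
    | nil => exact absurd ((h a).1 List.mem_cons_self) (List.not_mem_nil)
    | cons b bs =>
      have hab : a = b := by
        have ha := (h a).1 List.mem_cons_self
        have hb := (h b).2 List.mem_cons_self
        rcases List.mem_cons.1 ha with he | ha'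
        · exact he
        · rcases List.mem_cons.1 hb with he | hb'
          · exact he.symm
          · have h1 := (List.pairwise_cons.1 h₂).1 a ha'
            have h2 := (List.pairwise_cons.1 h₁).1 b hb'
            omega
      subst hab
      have htail : ∀ x, x ∈ as ↔ x ∈ bs := by
        intro x
        constructor
        · intro hx
          have hlt := (List.pairwise_cons.1 h₁).1 x hx
          rcases List.mem_cons.1 ((h x).1 (List.mem_cons_of_mem _ hx)) with he | hx'
          · omega
          · exact hx'
        · intro hx
          have hlt := (List.pairwise_cons.1 h₂).1 x hx
          rcases List.mem_cons.1 ((h x).2 (List.mem_cons_of_mem _ hx)) with he | hx'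
          · omega
          · exact hx'
      rw [ih (List.pairwise_cons.1 h₁).2 (List.pairwise_cons.1 h₂).2 htail]

lemma pvForall₂_append {α β : Type} {R : α → β → Prop} :
    ∀ {l₁ : List α} {l₂ : List β}, List.Forall₂ R l₁ l₂ →
    ∀ {u₁ : List α} {u₂ : List β}, List.Forall₂ R u₁ u₂ → List.Forall₂ R (l₁ ++ u₁) (l₂ ++ u₂) := by
  intro l₁ l₂ h
  induction h with
  | nil => intro _ _ h2; exact h2
  | cons hab _ ih => intro _ _ h2; exact List.Forall₂.cons hab (ih h2)

-- ===== the common characterisation of both programs' states =====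
def pvBlobOfMem (cn : Nat) (mem : List Nat) : List (String × Int) :=
  pvBlob (pvMinL (mem.map (pvRowI cn))) (pvMaxL (mem.map (pvRowI cn)))
         (pvMinL (mem.map (pvColI cn))) (pvMaxL (mem.map (pvColI cn)))

def pvMemSpec (g : List (List Int)) (bg : Int) (rn cn t v : Nat) (mem : List Nat) : Prop :=
  mem ≠ [] ∧ ∀ j, j ∈ mem ↔ j < t ∧ pvOkI g bg rn cn j ∧ pvRepI g bg rn cn v j

def pvMsSpec (g : List (List Int)) (bg : Int) (rn cn t : Nat) (ms : List Nat) : Prop :=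
  ms.Pairwise (· < ·) ∧ ∀ v, v ∈ ms ↔ v < t ∧ pvOkI g bg rn cn v ∧ pvRepI g bg rn cn v v

def pvInvA (g : List (List Int)) (bg : Int) (rn cn t : Nat)
    (st : List (List Bool) × List (List (String × Int))) : Prop :=
  pvShape rn cn st.1 ∧
  (∀ p, pvAV rn cn st.1 p ↔ pvOk g bg rn cn p ∧
    ∃ v, pvRepI g bg rn cn v (pvIdN cn p) ∧ v < t) ∧
  ∃ ms, pvMsSpec g bg rn cn t ms ∧
    List.Forall₂ (fun b v => ∃ mem, pvMemSpec g bg rn cn (rn * cn) v mem ∧ b = pvBlobOfMem cn mem)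
      st.2 ms

-- cell t cannot be a component representative once it is background or already represented
lemma pvNotRepT (g : List (List Int)) (bg : Int) (rn cn t : Nat)
    (hno : ¬ (pvOkI g bg rn cn t ∧ pvRepI g bg rn cn t t)) {j : Nat}
    (hokj : pvOkI g bg rn cn j) (h : pvRepI g bg rn cn t j) : False := by
  have hconn : pvConnI g bg rn cn j t := h.1
  have hokt : pvOkI g bg rn cn t := pvConnI_ok g bg rn cn hokj hconn
  exact hno ⟨hokt, pvRepI_self g bg rn cn hokj h⟩

lemma pvUnvisA_le (rn cn : Nat) (vis : List (List Bool)) : pvUnvisA rn cn vis ≤ rn * cn := by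
  rw [pvUnvisA, ← card_pvAll rn cn]
  exact Finset.card_filter_le _ _

-- the A-scan step preserves the invariant
lemma pvStepA (g : List (List Int)) (bg : Int) (rn cn : Nat) (hcn : 0 < cn)
    (rr cc : Nat) (hr : rr < rn) (hc : cc < cn)
    (st : List (List Bool) × List (List (String × Int)))
    (h : pvInvA g bg rn cn (rr * cn + cc) st) :
    pvInvA g bg rn cn (rr * cn + cc + 1)
      (pvScanCellA g bg rn cn (rn * cn) st (rr : Int) (cc : Int)) := by
  obtain ⟨hsh, hAV, ms, hms, hblobs⟩ := h
  set t := rr * cn + cc with hT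
  have hcell : pvCellOf cn t = ((rr : Int), (cc : Int)) := by
    obtain ⟨d1, d2⟩ := pvDivmod_unique cn rr cc hc
    simp only [pvCellOf, hT, d1, d2]
  have htn : t < rn * cn := by
    have hx : rr + 1 ≤ rn := by omega
    calc t < rr * cn + cn := by omega
      _ = (rr + 1) * cn := by ring
      _ ≤ rn * cn := Nat.mul_le_mul_right _ hx
  have hinb : pvInb rn cn ((rr : Int), (cc : Int)) := by
    rw [← hcell]; exact pvCellOf_inb rn cn hcn t htn
  have hidt : pvIdN cn ((rr : Int), (cc : Int)) = t := by
    rw [← hcell, pvIdN_cellOf]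
  by_cases hguard : pvCell g (rr : Int) (cc : Int) ≠ bg ∧ pvVGet st.1 (rr : Int) (cc : Int) = false
  · -- fresh seed: t is its component's representative and the BFS floods the whole component
    have hokc : pvOk g bg rn cn ((rr : Int), (cc : Int)) := ⟨hinb, hguard.1⟩
    have hokt : pvOkI g bg rn cn t := ⟨htn, by rw [hcell]; exact hokc⟩
    have hnAV : ¬ pvAV rn cn st.1 ((rr : Int), (cc : Int)) := by
      rintro ⟨-, hv⟩
      rw [hguard.2] at hv
      exact Bool.false_ne_true hv
    have hnorep : ¬ ∃ v, pvRepI g bg rn cn v t ∧ v < t := by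
      rintro ⟨v, hrep, hv⟩
      exact hnAV ((hAV _).2 ⟨hokc, by rw [hidt]; exact ⟨v, hrep, hv⟩⟩)
    obtain ⟨v₀, hrep₀⟩ := pvRepI_exists g bg rn cn hokt
    have hreptt : pvRepI g bg rn cn t t := by
      have hv₀ : v₀ = t := by
        have := pvRepI_le_self g bg rn cn hrep₀
        by_contra hne
        exact hnorep ⟨v₀, hrep₀, by omega⟩
      rwa [hv₀] at hrep₀
    have hstepA : pvScanCellA g bg rn cn (rn * cn) st (rr : Int) (cc : Int) =
        ((pvBfsLoop g bg rn cn (rn * cn) [((rr : Int), (cc : Int))]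
            (pvVSet st.1 (rr : Int) (cc : Int)) [((rr : Int), (cc : Int))]).1,
         st.2 ++ [pvBlob
           (pvMinL ((pvBfsLoop g bg rn cn (rn * cn) [((rr : Int), (cc : Int))]
              (pvVSet st.1 (rr : Int) (cc : Int)) [((rr : Int), (cc : Int))]).2.map (·.1)))
           (pvMaxL ((pvBfsLoop g bg rn cn (rn * cn) [((rr : Int), (cc : Int))]
              (pvVSet st.1 (rr : Int) (cc : Int)) [((rr : Int), (cc : Int))]).2.map (·.1)))
           (pvMinL ((pvBfsLoop g bg rn cn (rn * cn) [((rr : Int), (cc : Int))]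
              (pvVSet st.1 (rr : Int) (cc : Int)) [((rr : Int), (cc : Int))]).2.map (·.2)))
           (pvMaxL ((pvBfsLoop g bg rn cn (rn * cn) [((rr : Int), (cc : Int))]
              (pvVSet st.1 (rr : Int) (cc : Int)) [((rr : Int), (cc : Int))]).2.map (·.2)))]) := by
      simp only [pvScanCellA]
      rw [if_pos hguard]
    have hshv := pvShape_vset rn cn st.1 (rr : Int) (cc : Int) hsh
    have hAVv := pvAV_vset rn cn st.1 (rr : Int) (cc : Int) hsh hinb
    have hunv := pvUnvisA_vset rn cn st.1 (rr : Int) (cc : Int) hsh hinb hguard.2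
    obtain ⟨lsh, lchar, ext, l1, l2⟩ :=
      pvBfsLoop_spec g bg rn cn (rn * cn) [((rr : Int), (cc : Int))]
        (pvVSet st.1 (rr : Int) (cc : Int)) [((rr : Int), (cc : Int))] hshv
        (by
          intro w hw
          rw [List.mem_singleton] at hw
          rw [hw]
          exact (hAVv _).2 (Or.inr rfl))
        (by
          have := pvUnvisA_le rn cn st.1
          simp only [List.length_cons, List.length_nil]
          omega)
    set res := pvBfsLoop g bg rn cn (rn * cn) [((rr : Int), (cc : Int))]
      (pvVSet st.1 (rr : Int) (cc : Int)) [((rr : Int), (cc : Int))] with hres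
    -- the visited set V is closed under component steps
    have hVcl : ∀ p q, pvAV rn cn st.1 p → pvStepC g bg rn cn p q → pvAV rn cn st.1 q := by
      intro p q hp hpq
      obtain ⟨hokp, v, hrep, hv⟩ := (hAV p).1 hp
      have hokq := hpq.2
      obtain ⟨hpeq, hplt⟩ := pvCellOf_idN rn cn p hokp.1
      obtain ⟨hqeq, hqlt⟩ := pvCellOf_idN rn cn q hokq.1
      have hokip : pvOkI g bg rn cn (pvIdN cn p) := ⟨hplt, by rw [hpeq]; exact hokp⟩
      have hokiq : pvOkI g bg rn cn (pvIdN cn q) := ⟨hqlt, by rw [hqeq]; exact hokq⟩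
      have hadj : pvAdjI cn (pvIdN cn p) (pvIdN cn q) := by
        rw [← pvAdj_iff rn cn hcn hplt hqlt, hpeq, hqeq]
        exact hpq.1
      have hconn : pvConnI g bg rn cn (pvIdN cn p) (pvIdN cn q) :=
        Relation.ReflTransGen.single ⟨hadj, hokiq⟩
      exact (hAV q).2 ⟨hokq, v, (pvRepI_congr g bg rn cn hokip hconn v).1 hrep, hv⟩
    have hreach := pvReach_component g bg rn cn (pvAV rn cn st.1) ((rr : Int), (cc : Int))
      hokc hnAV hVcl
    have hAVfin : ∀ p, pvAV rn cn res.1 p ↔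
        pvAV rn cn st.1 p ∨ pvConnC g bg rn cn ((rr : Int), (cc : Int)) p := by
      intro p
      rw [lchar p]
      constructor
      · rintro (hv | ⟨w, hw, hrt⟩)
        · rcases (hAVv p).1 hv with hv' | rfl
          · exact Or.inl hv'
          · exact Or.inr Relation.ReflTransGen.refl
        · rw [List.mem_singleton] at hw
          subst hw
          right
          refine (hreach p).1 (Or.inr ?_)
          exact (pvRtg_congr g bg rn cn _ _ (fun y => hAVv y) ).1 hrt
      · rintro (hv | hconn)
        · exact Or.inl ((hAVv p).2 (Or.inl hv))
        · rcases (hreach p).2 hconn with heq | hrt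
          · exact Or.inl ((hAVv p).2 (Or.inr heq))
          · exact Or.inr ⟨_, List.mem_singleton.2 rfl,
              (pvRtg_congr g bg rn cn _ _ (fun y => hAVv y)).2 hrt⟩
    -- the component of t, as reps
    have hconn_to_rep : ∀ p, pvConnC g bg rn cn ((rr : Int), (cc : Int)) p →
        pvOk g bg rn cn p ∧ pvRepI g bg rn cn t (pvIdN cn p) := by
      intro p hconn
      have hokp := pvConnC_ok g bg rn cn hokc hconn
      obtain ⟨hpeq, hplt⟩ := pvCellOf_idN rn cn p hokp.1
      have hci : pvConnI g bg rn cn t (pvIdN cn p) := by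
        rw [pvConnI_iff_connC g bg rn cn hcn hokt hplt, hcell, hpeq]
        exact hconn
      exact ⟨hokp, (pvRepI_congr g bg rn cn hokt hci t).1 hreptt⟩
    have hrep_to_conn : ∀ p, pvOk g bg rn cn p → pvRepI g bg rn cn t (pvIdN cn p) →
        pvConnC g bg rn cn ((rr : Int), (cc : Int)) p := by
      intro p hokp hrep
      obtain ⟨hpeq, hplt⟩ := pvCellOf_idN rn cn p hokp.1
      have hokip : pvOkI g bg rn cn (pvIdN cn p) := ⟨hplt, by rw [hpeq]; exact hokp⟩
      have hci : pvConnI g bg rn cn t (pvIdN cn p) :=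
        pvConnI_symm g bg rn cn hokip hrep.1
      rw [pvConnI_iff_connC g bg rn cn hcn hokt hplt, hcell, hpeq] at hci
      exact hci
    -- membership of the collected cell list
    have hcells : ∀ p, p ∈ res.2 ↔ pvConnC g bg rn cn ((rr : Int), (cc : Int)) p := by
      intro p
      rw [l1, List.singleton_append, List.mem_cons]
      constructor
      · rintro (rfl | hp)
        · exact Relation.ReflTransGen.refl
        · obtain ⟨hfin, hnv⟩ := (l2 p).1 hp
          rcases (hAVfin p).1 hfin with hv | hconn
          · exact absurd ((hAVv p).2 (Or.inl hv)) hnv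
          · exact hconn
      · intro hconn
        by_cases hps : p = ((rr : Int), (cc : Int))
        · exact Or.inl hps
        · right
          refine (l2 p).2 ⟨(hAVfin p).2 (Or.inr hconn), ?_⟩
          intro hv
          rcases (hAVv p).1 hv with hv' | rfl
          · obtain ⟨hokp, v, hrep, hvlt⟩ := (hAV p).1 hv'
            have hrept := (hconn_to_rep p hconn).2
            have := pvRepI_unique g bg rn cn hrep hrept
            omega
          · exact hps rfl
    refine ⟨by rw [hstepA]; exact lsh, ?_, ?_⟩
    · intro p
      rw [hstepA]
      show pvAV rn cn res.1 p ↔ _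
      rw [hAVfin p]
      constructor
      · rintro (hv | hconn)
        · obtain ⟨hokp, v, hrep, hv'⟩ := (hAV p).1 hv
          exact ⟨hokp, v, hrep, by omega⟩
        · obtain ⟨hokp, hrep⟩ := hconn_to_rep p hconn
          exact ⟨hokp, t, hrep, by omega⟩
      · rintro ⟨hokp, v, hrep, hv⟩
        by_cases hvt : v < t
        · exact Or.inl ((hAV p).2 ⟨hokp, v, hrep, hvt⟩)
        · have : v = t := by omega
          subst this
          exact Or.inr (hrep_to_conn p hokp hrep)
    · refine ⟨ms ++ [t], ⟨?_, ?_⟩, ?_⟩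
      · rw [List.pairwise_append]
        refine ⟨hms.1, List.pairwise_singleton _ _, ?_⟩
        intro a ha b hb
        rw [List.mem_singleton] at hb
        subst hb
        exact ((hms.2 a).1 ha).1
      · intro v
        rw [List.mem_append, List.mem_singleton, hms.2 v]
        constructor
        · rintro (⟨hv, hok, hrep⟩ | rfl)
          · exact ⟨by omega, hok, hrep⟩
          · exact ⟨by omega, hokt, hreptt⟩
        · rintro ⟨hv, hok, hrep⟩
          by_cases hvt : v < t
          · exact Or.inl ⟨hvt, hok, hrep⟩
          · have : v = t := by omega
            exact Or.inr this
      · rw [hstepA]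
        show List.Forall₂ _ (st.2 ++ [_]) (ms ++ [t])
        refine pvForall₂_append hblobs ?_
        refine List.Forall₂.cons ?_ List.Forall₂.nil
        refine ⟨res.2.map (pvIdN cn), ⟨?_, ?_⟩, ?_⟩
        · rw [l1]
          simp
        · intro j
          rw [List.mem_map]
          constructor
          · rintro ⟨p, hp, rfl⟩
            have hconn := (hcells p).1 hp
            obtain ⟨hokp, hrep⟩ := hconn_to_rep p hconn
            obtain ⟨hpeq, hplt⟩ := pvCellOf_idN rn cn p hokp.1
            exact ⟨hplt, ⟨hplt, by rw [hpeq]; exact hokp⟩, hrep⟩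
          · rintro ⟨hj, hokj, hrep⟩
            refine ⟨pvCellOf cn j, ?_, pvIdN_cellOf cn j⟩
            rw [hcells]
            have hci : pvConnI g bg rn cn t j :=
              (pvRep_iff_conn g bg rn cn hokt hreptt hokj).1 hrep
            rw [pvConnI_iff_connC g bg rn cn hcn hokt hj, hcell] at hci
            exact hci
        · have hok_of_mem : ∀ p ∈ res.2, pvOk g bg rn cn p := by
            intro p hp
            exact pvConnC_ok g bg rn cn hokc ((hcells p).1 hp)
          have hrows : (res.2.map (pvIdN cn)).map (pvRowI cn) = res.2.map (·.1) := by
            rw [List.map_map]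
            refine List.map_congr_left ?_
            intro p hp
            have heq := (pvCellOf_idN rn cn p (hok_of_mem p hp).1).1
            show pvRowI cn (pvIdN cn p) = p.1
            rw [show pvRowI cn (pvIdN cn p) = (pvCellOf cn (pvIdN cn p)).1 from rfl, heq]
          have hcols : (res.2.map (pvIdN cn)).map (pvColI cn) = res.2.map (·.2) := by
            rw [List.map_map]
            refine List.map_congr_left ?_
            intro p hp
            have heq := (pvCellOf_idN rn cn p (hok_of_mem p hp).1).1
            show pvColI cn (pvIdN cn p) = p.2
            rw [show pvColI cn (pvIdN cn p) = (pvCellOf cn (pvIdN cn p)).2 from rfl, heq]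
          rw [pvBlobOfMem, hrows, hcols]
  · -- background or already visited: both the state and the spec stay put
    have hstepA : pvScanCellA g bg rn cn (rn * cn) st (rr : Int) (cc : Int) = st := by
      simp only [pvScanCellA]
      rw [if_neg hguard]
    have hno : ¬ (pvOkI g bg rn cn t ∧ pvRepI g bg rn cn t t) := by
      rintro ⟨hokt, hreptt⟩
      rcases not_and_or.1 hguard with hbg | hvis
      · push_neg at hbg
        have h2 := hokt.2
        rw [hcell] at h2
        exact h2.2 hbg
      · have hvt : pvVGet st.1 (rr : Int) (cc : Int) = true := by
          cases hb : pvVGet st.1 (rr : Int) (cc : Int)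
          · exact absurd hb hvis
          · rfl
        obtain ⟨hokp, v, hrep, hv⟩ := (hAV _).1 ⟨hinb, hvt⟩
        rw [hidt] at hrep
        have := pvRepI_unique g bg rn cn hrep hreptt
        omega
    rw [hstepA]
    refine ⟨hsh, ?_, ms, ⟨hms.1, ?_⟩, hblobs⟩
    · intro p
      rw [hAV p]
      refine and_congr_right fun hokp => ⟨fun ⟨v, hrep, hv⟩ => ⟨v, hrep, by omega⟩, ?_⟩
      rintro ⟨v, hrep, hv⟩
      by_cases hvt : v < t
      · exact ⟨v, hrep, hvt⟩
      · have : v = t := by omega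
        subst this
        obtain ⟨hpeq, hplt⟩ := pvCellOf_idN rn cn p hokp.1
        exact absurd hrep (fun hrep => pvNotRepT g bg rn cn t hno
          ⟨hplt, by rw [hpeq]; exact hokp⟩ hrep)
    · intro v
      rw [hms.2 v]
      constructor
      · rintro ⟨hv, hok, hrep⟩
        exact ⟨by omega, hok, hrep⟩
      · rintro ⟨hv, hok, hrep⟩
        by_cases hvt : v < t
        · exact ⟨hvt, hok, hrep⟩
        · have : v = t := by omega
          subst this
          exact absurd (⟨hok, hrep⟩ : _ ∧ _) hno

-- ===== folding A's scan over the whole grid =====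
lemma pvInitA (g : List (List Int)) (bg : Int) (rn cn : Nat) :
    pvInvA g bg rn cn 0 (List.replicate rn (List.replicate cn false), []) := by
  refine ⟨⟨List.length_replicate, ?_⟩, ?_, [], ⟨List.Pairwise.nil, ?_⟩, List.Forall₂.nil⟩
  · intro row hrow
    rw [List.eq_of_mem_replicate hrow]
    exact List.length_replicate
  · intro p
    constructor
    · rintro ⟨-, hv⟩
      rw [pvVGet_replicate] at hv
      exact absurd hv (by simp)
    · rintro ⟨-, v, -, hv⟩
      omega
  · intro v
    constructor
    · intro h
      exact absurd h (List.not_mem_nil)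
    · rintro ⟨hv, -, -⟩
      omega

lemma pvFoldColsA (g : List (List Int)) (bg : Int) (rn cn : Nat) (hcn : 0 < cn)
    (rr : Nat) (hr : rr < rn) :
    ∀ (k : Nat), k ≤ cn → ∀ st, pvInvA g bg rn cn (rr * cn) st →
    pvInvA g bg rn cn (rr * cn + k)
      ((List.range k).foldl
        (fun st (c : Nat) => pvScanCellA g bg rn cn (rn * cn) st (rr : Int) (c : Int)) st) := by
  intro k
  induction k with
  | zero =>
    intro _ st h
    simpa using h
  | succ k ih =>
    intro hk st h
    rw [List.range_succ, List.foldl_append, List.foldl_cons, List.foldl_nil]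
    exact pvStepA g bg rn cn hcn rr k hr (by omega) _ (ih (by omega) st h)

lemma pvFoldRowsA (g : List (List Int)) (bg : Int) (rn cn : Nat) (hcn : 0 < cn) :
    ∀ (k : Nat), k ≤ rn →
    pvInvA g bg rn cn (k * cn)
      ((List.range k).foldl
        (fun st (r : Nat) => (List.range cn).foldl
          (fun st (c : Nat) => pvScanCellA g bg rn cn (rn * cn) st (r : Int) (c : Int)) st)
        (List.replicate rn (List.replicate cn false), [])) := by
  intro k
  induction k with
  | zero =>
    intro _
    simpa using pvInitA g bg rn cn
  | succ k ih =>
    intro hk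
    rw [List.range_succ, List.foldl_append, List.foldl_cons, List.foldl_nil]
    have h := pvFoldColsA g bg rn cn hcn k (by omega) cn (le_refl cn) _ (ih (by omega))
    rwa [show k * cn + cn = (k + 1) * cn by ring] at h

-- ===== B: the ok array mirrors pvOkI =====
lemma pvOkArr_getD (g : List (List Int)) (bg : Int) (rn cn : Nat) (hcn : 0 < cn) (i : Nat) :
    ((pvOkArr g bg (rn * cn) cn).getD i false = true) ↔ pvOkI g bg rn cn i := by
  by_cases hi : i < rn * cn
  · rw [pvOkArr, List.getD_eq_getElem?_getD, List.getElem?_map, List.getElem?_range hi]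
    simp only [Option.map_some, Option.getD_some, decide_eq_true_eq]
    constructor
    · intro hne
      exact ⟨hi, pvCellOf_inb rn cn hcn i hi, hne⟩
    · rintro ⟨-, -, hne⟩
      exact hne
  · rw [pvOkArr, List.getD_eq_getElem?_getD,
      List.getElem?_eq_none (by simp only [List.length_map, List.length_range]; omega)]
    simp only [Option.getD_none]
    constructor
    · intro h
      exact absurd h (by simp)
    · rintro ⟨h, -⟩
      omega

-- ===== B: labels always hold the id of a connected ok cell =====
def pvGoodLab (g : List (List Int)) (bg : Int) (rn cn : Nat) (L : List Int) : Prop :=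
  L.length = rn * cn ∧ ∀ i, i < rn * cn →
    (pvOkI g bg rn cn i →
      (∃ j, pvOkI g bg rn cn j ∧ pvConnI g bg rn cn i j ∧ L.getD i 0 = (j : Int)) ∧
      L.getD i 0 ≤ (i : Int)) ∧
    (¬ pvOkI g bg rn cn i → L.getD i 0 = (i : Int))

-- id-arithmetic forms of the four adjacencies
lemma pvAdjI_up (cn i : Nat) (h : 0 < i / cn) : pvAdjI cn i (i - cn) := by
  have hcni : cn ≤ i := by
    by_contra hlt
    push_neg at hlt
    rw [Nat.div_eq_of_lt hlt] at h
    omega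
  exact Or.inl (by omega)

lemma pvAdjI_down (cn i : Nat) : pvAdjI cn i (i + cn) := Or.inr (Or.inl rfl)

lemma pvAdjI_left (cn i : Nat) (h : 0 < i % cn) : pvAdjI cn i (i - 1) := by
  have hi : 0 < i := by
    rcases Nat.eq_zero_or_pos i with rfl | hp
    · simp at h
    · exact hp
  exact Or.inr (Or.inr (Or.inl ⟨by omega, h⟩))

lemma pvAdjI_right (cn i : Nat) (hcn : 0 < cn) (h : i % cn + 1 < cn) : pvAdjI cn i (i + 1) := by
  have hd := Nat.div_add_mod' i cn
  have hi1 : i + 1 = i / cn * cn + (i % cn + 1) := by omega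
  obtain ⟨-, d2⟩ := pvDivmod_unique cn (i / cn) (i % cn + 1) h
  rw [← hi1] at d2
  exact Or.inr (Or.inr (Or.inr ⟨rfl, by omega⟩))

-- a neighbour's label is the id of a cell connected to i
lemma pvNbrLab (g : List (List Int)) (bg : Int) (rn cn : Nat) (L : List Int)
    (hgl : pvGoodLab g bg rn cn L) {i i' : Nat}
    (hoki' : pvOkI g bg rn cn i') (hadj : pvAdjI cn i i') :
    ∃ j, pvOkI g bg rn cn j ∧ pvConnI g bg rn cn i j ∧ L.getD i' 0 = (j : Int) := by
  obtain ⟨j, hokj, hconn, heq⟩ := ((hgl.2 i' hoki'.1).1 hoki').1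
  exact ⟨j, hokj, (Relation.ReflTransGen.single ⟨hadj, hoki'⟩).trans hconn, heq⟩

lemma pvLabMin (g : List (List Int)) (bg : Int) (rn cn : Nat) (i : Nat) (x y : Int)
    (hx : ∃ j, pvOkI g bg rn cn j ∧ pvConnI g bg rn cn i j ∧ x = (j : Int))
    (hy : ∃ j, pvOkI g bg rn cn j ∧ pvConnI g bg rn cn i j ∧ y = (j : Int)) :
    ∃ j, pvOkI g bg rn cn j ∧ pvConnI g bg rn cn i j ∧ min x y = (j : Int) := by
  rcases min_choice x y with h | h
  · rw [h]; exact hx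
  · rw [h]; exact hy

-- each stage only decreases the running min and keeps it a connected ok id
lemma pvStage_le_up (ok : List Bool) (labels : List Int) (cols i : Nat) (m : Int) :
    pvRelaxUp ok labels cols i m ≤ m := by
  rw [pvRelaxUp]; split_ifs; exacts [min_le_left _ _, le_refl _]
lemma pvStage_le_down (ok : List Bool) (labels : List Int) (rows cols i : Nat) (m : Int) :
    pvRelaxDown ok labels rows cols i m ≤ m := by
  rw [pvRelaxDown]; split_ifs; exacts [min_le_left _ _, le_refl _]
lemma pvStage_le_left (ok : List Bool) (labels : List Int) (cols i : Nat) (m : Int) :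
    pvRelaxLeft ok labels cols i m ≤ m := by
  rw [pvRelaxLeft]; split_ifs; exacts [min_le_left _ _, le_refl _]
lemma pvStage_le_right (ok : List Bool) (labels : List Int) (cols i : Nat) (m : Int) :
    pvRelaxRight ok labels cols i m ≤ m := by
  rw [pvRelaxRight]; split_ifs; exacts [min_le_left _ _, le_refl _]

lemma pvRelax_le (ok : List Bool) (labels : List Int) (rows cols i : Nat)
    (h : ok.getD i false = true) :
    pvRelax ok labels rows cols i ≤ labels.getD i 0 := by
  rw [pvRelax, if_neg (by rw [h]; simp)]
  calc pvRelaxRight ok labels cols i (pvRelaxLeft ok labels cols i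
        (pvRelaxDown ok labels rows cols i (pvRelaxUp ok labels cols i (labels.getD i 0))))
      ≤ pvRelaxLeft ok labels cols i
        (pvRelaxDown ok labels rows cols i (pvRelaxUp ok labels cols i (labels.getD i 0))) :=
        pvStage_le_right _ _ _ _ _
    _ ≤ pvRelaxDown ok labels rows cols i (pvRelaxUp ok labels cols i (labels.getD i 0)) :=
        pvStage_le_left _ _ _ _ _
    _ ≤ pvRelaxUp ok labels cols i (labels.getD i 0) := pvStage_le_down _ _ _ _ _ _
    _ ≤ labels.getD i 0 := pvStage_le_up _ _ _ _ _

-- the relaxed label is still the id of a connected ok cell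
lemma pvRelax_good (g : List (List Int)) (bg : Int) (rn cn : Nat) (hcn : 0 < cn)
    (L : List Int) (hgl : pvGoodLab g bg rn cn L) (i : Nat)
    (hoki : pvOkI g bg rn cn i) :
    ∃ j, pvOkI g bg rn cn j ∧ pvConnI g bg rn cn i j ∧
      pvRelax (pvOkArr g bg (rn * cn) cn) L rn cn i = (j : Int) := by
  set ok := pvOkArr g bg (rn * cn) cn with hok
  have htrue : ok.getD i false = true := (pvOkArr_getD g bg rn cn hcn i).2 hoki
  rw [pvRelax, if_neg (by rw [htrue]; simp)]
  have h0 : ∃ j, pvOkI g bg rn cn j ∧ pvConnI g bg rn cn i j ∧ L.getD i 0 = (j : Int) :=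
    ((hgl.2 i hoki.1).1 hoki).1
  have h1 : ∃ j, pvOkI g bg rn cn j ∧ pvConnI g bg rn cn i j ∧
      pvRelaxUp ok L cn i (L.getD i 0) = (j : Int) := by
    rw [pvRelaxUp]
    split_ifs with hc
    · exact pvLabMin g bg rn cn i _ _ h0
        (pvNbrLab g bg rn cn L hgl ((pvOkArr_getD g bg rn cn hcn _).1 hc.2)
          (pvAdjI_up cn i hc.1))
    · exact h0
  have h2 : ∃ j, pvOkI g bg rn cn j ∧ pvConnI g bg rn cn i j ∧
      pvRelaxDown ok L rn cn i (pvRelaxUp ok L cn i (L.getD i 0)) = (j : Int) := by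
    rw [pvRelaxDown]
    split_ifs with hc
    · exact pvLabMin g bg rn cn i _ _ h1
        (pvNbrLab g bg rn cn L hgl ((pvOkArr_getD g bg rn cn hcn _).1 hc.2)
          (pvAdjI_down cn i))
    · exact h1
  have h3 : ∃ j, pvOkI g bg rn cn j ∧ pvConnI g bg rn cn i j ∧
      pvRelaxLeft ok L cn i (pvRelaxDown ok L rn cn i (pvRelaxUp ok L cn i (L.getD i 0))) =
        (j : Int) := by
    rw [pvRelaxLeft]
    split_ifs with hc
    · exact pvLabMin g bg rn cn i _ _ h2
        (pvNbrLab g bg rn cn L hgl ((pvOkArr_getD g bg rn cn hcn _).1 hc.2)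
          (pvAdjI_left cn i hc.1))
    · exact h2
  rw [pvRelaxRight]
  split_ifs with hc
  · exact pvLabMin g bg rn cn i _ _ h3
      (pvNbrLab g bg rn cn L hgl ((pvOkArr_getD g bg rn cn hcn _).1 hc.2)
        (pvAdjI_right cn i hcn hc.1))
  · exact h3

lemma pvRound_getD (ok : List Bool) (rows cols : Nat) (L : List Int) (i : Nat)
    (hi : i < rows * cols) :
    (pvRoundB ok rows cols L).getD i 0 = pvRelax ok L rows cols i := by
  rw [pvRoundB, List.getD_eq_getElem?_getD, List.getElem?_map, List.getElem?_range hi]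
  rfl

lemma pvRound_good (g : List (List Int)) (bg : Int) (rn cn : Nat) (hcn : 0 < cn)
    (L : List Int) (hgl : pvGoodLab g bg rn cn L) :
    pvGoodLab g bg rn cn (pvRoundB (pvOkArr g bg (rn * cn) cn) rn cn L) := by
  refine ⟨by rw [pvRoundB, List.length_map, List.length_range], ?_⟩
  intro i hi
  rw [pvRound_getD _ _ _ _ _ hi]
  constructor
  · intro hoki
    refine ⟨pvRelax_good g bg rn cn hcn L hgl i hoki, ?_⟩
    calc pvRelax (pvOkArr g bg (rn * cn) cn) L rn cn i ≤ L.getD i 0 :=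
        pvRelax_le _ _ _ _ _ ((pvOkArr_getD g bg rn cn hcn i).2 hoki)
      _ ≤ (i : Int) := ((hgl.2 i hi).1 hoki).2
  · intro hoki
    have hfalse : (pvOkArr g bg (rn * cn) cn).getD i false = false := by
      cases hb : (pvOkArr g bg (rn * cn) cn).getD i false
      · rfl
      · exact absurd ((pvOkArr_getD g bg rn cn hcn i).1 hb) hoki
    rw [pvRelax, if_pos hfalse]
    exact (hgl.2 i hi).2 hoki

-- ===== at a fixpoint, labels are constant on components and equal the component minimum =====
lemma pvFix_le (g : List (List Int)) (bg : Int) (rn cn : Nat) (hcn : 0 < cn) (L : List Int)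
    (hfix : pvRoundB (pvOkArr g bg (rn * cn) cn) rn cn L = L) {i i' : Nat}
    (hoki : pvOkI g bg rn cn i) (hoki' : pvOkI g bg rn cn i') (hadj : pvAdjI cn i i') :
    L.getD i 0 ≤ L.getD i' 0 := by
  set ok := pvOkArr g bg (rn * cn) cn with hok
  have htrue : ok.getD i false = true := (pvOkArr_getD g bg rn cn hcn i).2 hoki
  have htrue' : ok.getD i' false = true := (pvOkArr_getD g bg rn cn hcn i').2 hoki'
  have hrel : L.getD i 0 = pvRelax ok L rn cn i := by
    rw [← pvRound_getD ok rn cn L i hoki.1, hfix]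
  rw [hrel, pvRelax, if_neg (by rw [htrue]; simp)]
  rcases hadj with hup | hdown | ⟨hleft, hm⟩ | ⟨hright, hm⟩
  · -- i' is directly above i
    have hidx : i - cn = i' := by omega
    have hdiv : 0 < i / cn := Nat.div_pos (by omega) hcn
    have hcnd : 0 < i / cn ∧ ok.getD (i - cn) false = true := ⟨hdiv, by rw [hidx]; exact htrue'⟩
    refine le_trans (pvStage_le_right _ _ _ _ _) (le_trans (pvStage_le_left _ _ _ _ _)
      (le_trans (pvStage_le_down _ _ _ _ _ _) ?_))
    rw [pvRelaxUp, if_pos hcnd, hidx]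
    exact min_le_right _ _
  · -- i' is directly below i
    have hdiv : i' / cn = i / cn + 1 := by rw [← hdown, Nat.add_div_right _ hcn]
    have hlt : i' / cn < rn := (Nat.div_lt_iff_lt_mul hcn).2 hoki'.1
    have hcnd : i / cn + 1 < rn ∧ ok.getD (i + cn) false = true :=
      ⟨by omega, by rw [hdown]; exact htrue'⟩
    refine le_trans (pvStage_le_right _ _ _ _ _) (le_trans (pvStage_le_left _ _ _ _ _) ?_)
    rw [pvRelaxDown, if_pos hcnd, hdown]
    exact min_le_right _ _
  · -- i' is directly left of i
    have hidx : i - 1 = i' := by omega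
    have hcnd : 0 < i % cn ∧ ok.getD (i - 1) false = true := ⟨hm, by rw [hidx]; exact htrue'⟩
    refine le_trans (pvStage_le_right _ _ _ _ _) ?_
    rw [pvRelaxLeft, if_pos hcnd, hidx]
    exact min_le_right _ _
  · -- i' is directly right of i
    have hd := Nat.div_add_mod' i cn
    have hmi := Nat.mod_lt i hcn
    have hcnd : i % cn + 1 < cn ∧ ok.getD (i + 1) false = true := by
      refine ⟨?_, by rw [hright]; exact htrue'⟩
      by_contra hge
      have hcc : i % cn + 1 = cn := by omega
      have h2 : (i / cn + 1) * cn = i / cn * cn + cn := by ring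
      have hi' : i + 1 = (i / cn + 1) * cn + 0 := by omega
      obtain ⟨-, d2⟩ := pvDivmod_unique cn (i / cn + 1) 0 hcn
      rw [← hi'] at d2
      rw [← hright] at hm
      omega
    rw [pvRelaxRight, if_pos hcnd, hright]
    exact min_le_right _ _

lemma pvFix_const (g : List (List Int)) (bg : Int) (rn cn : Nat) (hcn : 0 < cn) (L : List Int)
    (hfix : pvRoundB (pvOkArr g bg (rn * cn) cn) rn cn L = L) {i j : Nat}
    (hoki : pvOkI g bg rn cn i) (hconn : pvConnI g bg rn cn i j) :
    L.getD i 0 = L.getD j 0 := by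
  induction hconn with
  | refl => rfl
  | tail hab hbc ih =>
    have hoka := pvConnI_ok g bg rn cn hoki hab
    have h1 := pvFix_le g bg rn cn hcn L hfix hoka hbc.2 hbc.1
    have h2 := pvFix_le g bg rn cn hcn L hfix hbc.2 hoka ((pvAdjI_symm _ _ _).1 hbc.1)
    rw [ih]
    exact le_antisymm h1 h2

lemma pvLabels_rep (g : List (List Int)) (bg : Int) (rn cn : Nat) (hcn : 0 < cn) (L : List Int)
    (hfix : pvRoundB (pvOkArr g bg (rn * cn) cn) rn cn L = L)
    (hgl : pvGoodLab g bg rn cn L) {i v : Nat}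
    (hoki : pvOkI g bg rn cn i) (hrep : pvRepI g bg rn cn v i) :
    L.getD i 0 = (v : Int) := by
  have hokv := pvConnI_ok g bg rn cn hoki hrep.1
  have hconst := pvFix_const g bg rn cn hcn L hfix hoki hrep.1
  have hrepvv := pvRepI_self g bg rn cn hoki hrep
  obtain ⟨j, hokj, hconnvj, heq⟩ := ((hgl.2 v hokv.1).1 hokv).1
  have hle := ((hgl.2 v hokv.1).1 hokv).2
  have hvj : v ≤ j := hrepvv.2 j hconnvj
  rw [hconst, heq]
  rw [heq] at hle
  have : j = v := by omega
  rw [this]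

-- ===== the while-changed loop: a decreasing measure reaches the fixpoint =====
def pvSumL (n : Nat) (L : List Int) : Nat := ∑ i ∈ Finset.range n, (L.getD i 0).toNat

lemma pvGood_nonneg (g : List (List Int)) (bg : Int) (rn cn : Nat) (L : List Int)
    (hgl : pvGoodLab g bg rn cn L) {i : Nat} (hi : i < rn * cn) : 0 ≤ L.getD i 0 := by
  by_cases hok : pvOkI g bg rn cn i
  · obtain ⟨j, -, -, heq⟩ := ((hgl.2 i hi).1 hok).1
    rw [heq]
    exact Int.natCast_nonneg j
  · rw [(hgl.2 i hi).2 hok]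
    exact Int.natCast_nonneg i

lemma pvRound_lt (g : List (List Int)) (bg : Int) (rn cn : Nat) (hcn : 0 < cn) (L : List Int)
    (hgl : pvGoodLab g bg rn cn L)
    (hne : pvRoundB (pvOkArr g bg (rn * cn) cn) rn cn L ≠ L) :
    pvSumL (rn * cn) (pvRoundB (pvOkArr g bg (rn * cn) cn) rn cn L) < pvSumL (rn * cn) L := by
  set R := pvRoundB (pvOkArr g bg (rn * cn) cn) rn cn L with hR
  have hgr : pvGoodLab g bg rn cn R := pvRound_good g bg rn cn hcn L hgl
  have hle : ∀ i, i < rn * cn → R.getD i 0 ≤ L.getD i 0 := by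
    intro i hi
    rw [hR, pvRound_getD _ _ _ _ _ hi]
    by_cases hok : pvOkI g bg rn cn i
    · exact pvRelax_le _ _ _ _ _ ((pvOkArr_getD g bg rn cn hcn i).2 hok)
    · have hfalse : (pvOkArr g bg (rn * cn) cn).getD i false = false := by
        cases hb : (pvOkArr g bg (rn * cn) cn).getD i false
        · rfl
        · exact absurd ((pvOkArr_getD g bg rn cn hcn i).1 hb) hok
      rw [pvRelax, if_pos hfalse]
  have hex : ∃ i, i < rn * cn ∧ R.getD i 0 ≠ L.getD i 0 := by
    by_contra hall
    push_neg at hall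
    apply hne
    apply List.ext_getElem (by rw [hgr.1, hgl.1])
    intro k h1 h2
    have hk : k < rn * cn := by rw [hgr.1] at h1; exact h1
    have := hall k hk
    rwa [List.getD_eq_getElem _ _ h1, List.getD_eq_getElem _ _ h2] at this
  obtain ⟨i₀, hi₀, hne₀⟩ := hex
  refine Finset.sum_lt_sum ?_ ⟨i₀, Finset.mem_range.2 hi₀, ?_⟩
  · intro i hi
    have hi' := Finset.mem_range.1 hi
    have := hle i hi'
    have h0 := pvGood_nonneg g bg rn cn R hgr hi'
    omega
  · have := hle i₀ hi₀
    have h0 := pvGood_nonneg g bg rn cn R hgr hi₀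
    omega

lemma pvIterB_fix (g : List (List Int)) (bg : Int) (rn cn : Nat) (hcn : 0 < cn) :
    ∀ (fuel : Nat) (L : List Int), pvGoodLab g bg rn cn L → pvSumL (rn * cn) L < fuel →
    pvGoodLab g bg rn cn (pvIterB (pvOkArr g bg (rn * cn) cn) rn cn fuel L) ∧
    pvRoundB (pvOkArr g bg (rn * cn) cn) rn cn
        (pvIterB (pvOkArr g bg (rn * cn) cn) rn cn fuel L) =
      pvIterB (pvOkArr g bg (rn * cn) cn) rn cn fuel L := by
  intro fuel
  induction fuel with
  | zero =>
    intro L _ hlt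
    exact absurd hlt (Nat.not_lt_zero _)
  | succ fuel ih =>
    intro L hgl hlt
    simp only [pvIterB]
    by_cases h : pvRoundB (pvOkArr g bg (rn * cn) cn) rn cn L = L
    · rw [if_pos h]
      exact ⟨hgl, h⟩
    · rw [if_neg h]
      refine ih _ (pvRound_good g bg rn cn hcn L hgl) ?_
      have := pvRound_lt g bg rn cn hcn L hgl h
      omega

lemma pvInit_getD (n i : Nat) (hi : i < n) :
    ((List.range n).map (fun (k : Nat) => (k : Int))).getD i 0 = (i : Int) := by
  rw [List.getD_eq_getElem?_getD, List.getElem?_map, List.getElem?_range hi]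
  rfl

lemma pvInit_good (g : List (List Int)) (bg : Int) (rn cn : Nat) :
    pvGoodLab g bg rn cn ((List.range (rn * cn)).map (fun (k : Nat) => (k : Int))) := by
  refine ⟨by rw [List.length_map, List.length_range], ?_⟩
  intro i hi
  rw [pvInit_getD _ _ hi]
  exact ⟨fun hok => ⟨⟨i, hok, Relation.ReflTransGen.refl, rfl⟩, le_refl _⟩, fun _ => rfl⟩

lemma pvInit_sum (n : Nat) : pvSumL n ((List.range n).map (fun (k : Nat) => (k : Int))) ≤ n * n := by
  have h := Finset.sum_le_card_nsmul (Finset.range n)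
    (fun i => (((List.range n).map (fun (k : Nat) => (k : Int))).getD i 0).toNat) n ?_
  · rwa [Finset.card_range, smul_eq_mul] at h
  · intro i hi
    dsimp only
    have hin := Finset.mem_range.1 hi
    rw [pvInit_getD _ _ hin]
    simp only [Int.toNat_natCast]
    omega

-- the final label of every ok cell is its component's representative (as an Int)
lemma pvLabels_final (g : List (List Int)) (bg : Int) (rn cn : Nat) (hcn : 0 < cn) :
    ∀ {i v : Nat}, pvOkI g bg rn cn i → pvRepI g bg rn cn v i →
    (pvIterB (pvOkArr g bg (rn * cn) cn) rn cn (rn * cn * (rn * cn) + 1)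
        ((List.range (rn * cn)).map (fun (k : Nat) => (k : Int)))).getD i 0 = (v : Int) := by
  intro i v hoki hrep
  have hsum : pvSumL (rn * cn) ((List.range (rn * cn)).map (fun (k : Nat) => (k : Int))) <
      rn * cn * (rn * cn) + 1 := by
    have := pvInit_sum (rn * cn)
    omega
  obtain ⟨hgl, hfix⟩ := pvIterB_fix g bg rn cn hcn (rn * cn * (rn * cn) + 1)
    ((List.range (rn * cn)).map (fun (k : Nat) => (k : Int))) (pvInit_good g bg rn cn) hsum
  exact pvLabels_rep g bg rn cn hcn _ hfix hgl hoki hrep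

-- ===== B's aggregation pass over the final labels =====
def pvInvB (g : List (List Int)) (bg : Int) (rn cn t : Nat)
    (d : PySem.Dict Int (Int × Int × Int × Int)) : Prop :=
  ∃ ms, pvMsSpec g bg rn cn t ms ∧
    List.Forall₂ (fun (kv : Int × (Int × Int × Int × Int)) (v : Nat) =>
      kv.1 = (v : Int) ∧ ∃ mem, pvMemSpec g bg rn cn t v mem ∧
        kv.2 = (pvMinL (mem.map (pvRowI cn)), pvMaxL (mem.map (pvRowI cn)),
                pvMinL (mem.map (pvColI cn)), pvMaxL (mem.map (pvColI cn))))
      d.items ms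

lemma pvForall₂_fst {ν : Type} {P : (Int × ν) → Nat → Prop} :
    ∀ {items : List (Int × ν)} {ms : List Nat},
    List.Forall₂ (fun (kv : Int × ν) (v : Nat) => kv.1 = (v : Int) ∧ P kv v) items ms →
    items.map (·.1) = ms.map (fun (v : Nat) => (v : Int)) := by
  intro items ms h
  induction h with
  | nil => rfl
  | cons hab _ ih => rw [List.map_cons, List.map_cons, hab.1, ih]

lemma pvForall₂_mem_right {α β : Type} {R : α → β → Prop} :
    ∀ {l₁ : List α} {l₂ : List β}, List.Forall₂ R l₁ l₂ → ∀ {b : β}, b ∈ l₂ →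
    ∃ a, a ∈ l₁ ∧ R a b := by
  intro l₁ l₂ h
  induction h with
  | nil =>
    intro b hb
    exact absurd hb (List.not_mem_nil)
  | cons hab _ ih =>
    intro b hb
    rcases List.mem_cons.1 hb with heq | hb'
    · exact ⟨_, List.mem_cons_self, by rw [heq]; exact hab⟩
    · obtain ⟨a, ha, hr⟩ := ih hb'
      exact ⟨a, List.mem_cons_of_mem _ ha, hr⟩

lemma pvForall₂_update {ν : Type} {R S : (Int × ν) → Nat → Prop} (k : Nat) (w : ν)
    (hfst : ∀ kv v, R kv v → kv.1 = (v : Int))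
    (hne : ∀ kv v, R kv v → v ≠ k → S kv v)
    (heq : ∀ kv, R kv k → S ((k : Int), w) k) :
    ∀ {items : List (Int × ν)} {ms : List Nat}, List.Forall₂ R items ms →
    List.Forall₂ S (items.map (fun p => if p.1 == (k : Int) then ((k : Int), w) else p)) ms := by
  intro items ms h
  induction h with
  | nil => exact List.Forall₂.nil
  | @cons a b l₁ l₂ hab _ ih =>
    rw [List.map_cons]
    by_cases hbk : b = k
    · subst hbk
      have hcond : (a.1 == ((b : Nat) : Int)) = true := by
        rw [hfst a b hab]
        exact beq_self_eq_true _
      rw [if_pos hcond]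
      exact List.Forall₂.cons (heq a hab) ih
    · have hcond : ¬ ((a.1 == (k : Int)) = true) := by
        rw [hfst a b hab]
        simp only [beq_iff_eq, Nat.cast_inj]
        exact hbk
      rw [if_neg hcond]
      exact List.Forall₂.cons (hne a b hab hbk) ih

-- the B-scan step preserves the invariant
lemma pvStepB (g : List (List Int)) (bg : Int) (rn cn : Nat) (hcn : 0 < cn) (L : List Int)
    (hlab : ∀ {i v : Nat}, pvOkI g bg rn cn i → pvRepI g bg rn cn v i → L.getD i 0 = (v : Int))
    (i : Nat) (hi : i < rn * cn)
    (d : PySem.Dict Int (Int × Int × Int × Int)) (h : pvInvB g bg rn cn i d) :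
    pvInvB g bg rn cn (i + 1) (pvAgg (pvOkArr g bg (rn * cn) cn) L cn d i) := by
  obtain ⟨ms, hms, hf⟩ := h
  by_cases hoki : pvOkI g bg rn cn i
  · obtain ⟨v', hrep⟩ := pvRepI_exists g bg rn cn hoki
    have hokv' : pvOkI g bg rn cn v' := pvConnI_ok g bg rn cn hoki hrep.1
    have hv'le : v' ≤ i := pvRepI_le_self g bg rn cn hrep
    have hkey : L.getD i 0 = (v' : Int) := hlab hoki hrep
    have htrue : (pvOkArr g bg (rn * cn) cn).getD i false = true :=
      (pvOkArr_getD g bg rn cn hcn i).2 hoki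
    have hkeys : d.items.map (·.1) = ms.map (fun (v : Nat) => (v : Int)) := pvForall₂_fst hf
    have hkeysd : d.keys = ms.map (fun (v : Nat) => (v : Int)) := by
      simp only [PySem.Dict.keys]
      exact hkeys
    have hmsnd : ms.Nodup := List.Pairwise.imp (fun hlt => Nat.ne_of_lt hlt) hms.1
    have hnodup : d.keys.Nodup := by
      rw [hkeysd]
      exact hmsnd.map (fun a b hab => by exact_mod_cast hab)
    have hrepselfv' : pvRepI g bg rn cn v' v' := pvRepI_self g bg rn cn hoki hrep
    have hagg : pvAgg (pvOkArr g bg (rn * cn) cn) L cn d i =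
        (match d.get? (L.getD i 0) with
         | none => d.insert (L.getD i 0)
             (((i / cn : Nat) : Int), ((i / cn : Nat) : Int),
              ((i % cn : Nat) : Int), ((i % cn : Nat) : Int))
         | some b => d.insert (L.getD i 0)
             (min b.1 ((i / cn : Nat) : Int), max b.2.1 ((i / cn : Nat) : Int),
              min b.2.2.1 ((i % cn : Nat) : Int), max b.2.2.2 ((i % cn : Nat) : Int))) := by
      rw [pvAgg, if_pos htrue]
    by_cases hv'i : v' = i
    · -- a fresh representative: a new dict key is appended
      subst hv'i
      have hnotin : v' ∉ ms := fun hmem => by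
        have := (hms.2 v').1 hmem
        omega
      have hget : d.get? ((v' : Nat) : Int) = none := by
        rw [PySem.Dict.get?_eq_none_iff_not_mem_keys, hkeysd]
        intro hmem
        obtain ⟨w, hw, hwe⟩ := List.mem_map.1 hmem
        have hwv : w = v' := by exact_mod_cast hwe
        rw [hwv] at hw
        exact hnotin hw
      have hcont : d.contains ((v' : Nat) : Int) = false := by
        rw [PySem.Dict.contains_eq_decide_mem_keys, hkeysd]
        apply decide_eq_false
        intro hmem
        obtain ⟨w, hw, hwe⟩ := List.mem_map.1 hmem
        have hwv : w = v' := by exact_mod_cast hwe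
        rw [hwv] at hw
        exact hnotin hw
      rw [hagg, hkey, hget]
      refine ⟨ms ++ [v'], ⟨?_, ?_⟩, ?_⟩
      · rw [List.pairwise_append]
        refine ⟨hms.1, List.pairwise_singleton _ _, ?_⟩
        intro a ha b hb
        rw [List.mem_singleton] at hb
        subst hb
        exact ((hms.2 a).1 ha).1
      · intro v
        rw [List.mem_append, List.mem_singleton, hms.2 v]
        constructor
        · rintro (⟨h1, h2, h3⟩ | rfl)
          · exact ⟨by omega, h2, h3⟩
          · exact ⟨by omega, hoki, hrep⟩
        · rintro ⟨h1, h2, h3⟩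
          by_cases hvi : v = v'
          · exact Or.inr hvi
          · left
            refine ⟨?_, h2, h3⟩
            by_cases hv2 : v < v'
            · exact hv2
            · exfalso
              have : v = v' := by
                have hle2 := pvRepI_le_self g bg rn cn h3
                omega
              exact hvi this
      · rw [PySem.Dict.items_insert_of_not_contains d _ hcont]
        refine pvForall₂_append ?_ ?_
        · refine List.Forall₂.imp ?_ hf
          rintro kv v ⟨hfst, mem, ⟨hne0, hiff⟩, hval⟩
          refine ⟨hfst, mem, ⟨hne0, ?_⟩, hval⟩
          intro j
          rw [hiff j]
          constructor
          · rintro ⟨h1, h2, h3⟩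
            exact ⟨by omega, h2, h3⟩
          · rintro ⟨h1, h2, h3⟩
            by_cases hji : j = v'
            · exfalso
              rw [hji] at h3
              have hvv : v = v' := pvRepI_unique g bg rn cn h3 hrep
              subst hvv
              obtain ⟨j₀, hj₀⟩ := List.exists_mem_of_ne_nil mem hne0
              obtain ⟨hj₀lt, hj₀ok, hj₀rep⟩ := (hiff j₀).1 hj₀
              have := hj₀rep.2 j₀ Relation.ReflTransGen.refl
              omega
            · exact ⟨by omega, h2, h3⟩
        · refine List.Forall₂.cons ⟨rfl, [v'], ⟨by simp, ?_⟩, rfl⟩ List.Forall₂.nil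
          intro j
          rw [List.mem_singleton]
          constructor
          · intro hj
            rw [hj]
            exact ⟨by omega, hoki, hrep⟩
          · rintro ⟨h1, h2, h3⟩
            have := h3.2 j Relation.ReflTransGen.refl
            omega
    · -- an existing representative: its box is grown in place
      have hv'lt : v' < i := lt_of_le_of_ne hv'le hv'i
      have hv'mem : v' ∈ ms := (hms.2 v').2 ⟨hv'lt, hokv', hrepselfv'⟩
      obtain ⟨kv, hkvmem, hkv⟩ := pvForall₂_mem_right hf hv'mem
      obtain ⟨hkv1, mem0, hmem0, hval0⟩ := hkv
      have hget : d.get? ((v' : Int)) = some kv.2 := by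
        refine PySem.Dict.get?_of_mem_items d ?_ hnodup
        have : ((v' : Int), kv.2) = kv := by
          rw [← hkv1]
        rw [this]
        exact hkvmem
      have hcont : d.contains ((v' : Int)) = true := by
        rw [PySem.Dict.contains_eq_decide_mem_keys, hkeysd]
        exact decide_eq_true (List.mem_map.2 ⟨v', hv'mem, rfl⟩)
      rw [hagg, hkey, hget]
      refine ⟨ms, ⟨hms.1, ?_⟩, ?_⟩
      · intro v
        rw [hms.2 v]
        constructor
        · rintro ⟨h1, h2, h3⟩
          exact ⟨by omega, h2, h3⟩
        · rintro ⟨h1, h2, h3⟩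
          by_cases hvi : v = i
          · exfalso
            rw [hvi] at h3
            have := pvRepI_unique g bg rn cn h3 hrep
            omega
          · exact ⟨by omega, h2, h3⟩
      · rw [PySem.Dict.items_insert_of_contains d _ hcont]
        refine pvForall₂_update v' _ (fun kv0 v hr => hr.1) ?_ ?_ hf
        · rintro kv0 v ⟨hfst0, mem1, ⟨hne1, hiff1⟩, hval1⟩ hvne
          refine ⟨hfst0, mem1, ⟨hne1, ?_⟩, hval1⟩
          intro j
          rw [hiff1 j]
          constructor
          · rintro ⟨h1, h2, h3⟩
            exact ⟨by omega, h2, h3⟩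
          · rintro ⟨h1, h2, h3⟩
            by_cases hji : j = i
            · exfalso
              rw [hji] at h3
              exact hvne (pvRepI_unique g bg rn cn h3 hrep)
            · exact ⟨by omega, h2, h3⟩
        · rintro kv0 ⟨hfst0, mem1, ⟨hne1, hiff1⟩, hval1⟩
          refine ⟨rfl, mem1 ++ [i], ⟨by simp, ?_⟩, ?_⟩
          · intro j
            rw [List.mem_append, List.mem_singleton, hiff1 j]
            constructor
            · rintro (⟨h1, h2, h3⟩ | heq)
              · exact ⟨by omega, h2, h3⟩
              · rw [heq]
                exact ⟨by omega, hoki, hrep⟩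
            · rintro ⟨h1, h2, h3⟩
              by_cases hji : j = i
              · exact Or.inr hji
              · exact Or.inl ⟨by omega, h2, h3⟩
          · -- the two recorded boxes agree (same member set), and the new cell grows them alike
            have hmm : ∀ x, x ∈ mem0 ↔ x ∈ mem1 := by
              intro x
              rw [hmem0.2 x, hiff1 x]
            have hone : mem0.map (pvRowI cn) ≠ [] := by
              simp [hmem0.1]
            have hone1 : mem1.map (pvRowI cn) ≠ [] := by
              simp [hne1]
            have honec : mem0.map (pvColI cn) ≠ [] := by
              simp [hmem0.1]
            have honec1 : mem1.map (pvColI cn) ≠ [] := by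
              simp [hne1]
            have hmapr : ∀ x, x ∈ mem0.map (pvRowI cn) ↔ x ∈ mem1.map (pvRowI cn) := by
              intro x
              simp only [List.mem_map]
              exact ⟨fun ⟨j, hj, he⟩ => ⟨j, (hmm j).1 hj, he⟩,
                fun ⟨j, hj, he⟩ => ⟨j, (hmm j).2 hj, he⟩⟩
            have hmapc : ∀ x, x ∈ mem0.map (pvColI cn) ↔ x ∈ mem1.map (pvColI cn) := by
              intro x
              simp only [List.mem_map]
              exact ⟨fun ⟨j, hj, he⟩ => ⟨j, (hmm j).1 hj, he⟩,
                fun ⟨j, hj, he⟩ => ⟨j, (hmm j).2 hj, he⟩⟩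
            have e1 : pvMinL (mem0.map (pvRowI cn)) = pvMinL (mem1.map (pvRowI cn)) :=
              pvMinL_congr hone hone1 hmapr
            have e2 : pvMaxL (mem0.map (pvRowI cn)) = pvMaxL (mem1.map (pvRowI cn)) :=
              pvMaxL_congr hone hone1 hmapr
            have e3 : pvMinL (mem0.map (pvColI cn)) = pvMinL (mem1.map (pvColI cn)) :=
              pvMinL_congr honec honec1 hmapc
            have e4 : pvMaxL (mem0.map (pvColI cn)) = pvMaxL (mem1.map (pvColI cn)) :=
              pvMaxL_congr honec honec1 hmapc
            rw [hval0]
            simp only [List.map_append, List.map_singleton]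
            rw [pvMinL_append_singleton hone1, pvMaxL_append_singleton hone1,
              pvMinL_append_singleton honec1, pvMaxL_append_singleton honec1,
              e1, e2, e3, e4]
            rfl
  · -- background cell: nothing changes
    have hfalse : (pvOkArr g bg (rn * cn) cn).getD i false = false := by
      cases hb : (pvOkArr g bg (rn * cn) cn).getD i false
      · rfl
      · exact absurd ((pvOkArr_getD g bg rn cn hcn i).1 hb) hoki
    rw [pvAgg, if_neg (by rw [hfalse]; simp)]
    refine ⟨ms, ⟨hms.1, ?_⟩, ?_⟩
    · intro v
      rw [hms.2 v]
      constructor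
      · rintro ⟨h1, h2, h3⟩
        exact ⟨by omega, h2, h3⟩
      · rintro ⟨h1, h2, h3⟩
        by_cases hvi : v = i
        · exfalso
          rw [hvi] at h2
          exact hoki h2
        · exact ⟨by omega, h2, h3⟩
    · refine List.Forall₂.imp ?_ hf
      rintro kv v ⟨hfst, mem, ⟨hne0, hiff⟩, hval⟩
      refine ⟨hfst, mem, ⟨hne0, ?_⟩, hval⟩
      intro j
      rw [hiff j]
      constructor
      · rintro ⟨h1, h2, h3⟩
        exact ⟨by omega, h2, h3⟩
      · rintro ⟨h1, h2, h3⟩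
        by_cases hji : j = i
        · exfalso
          rw [hji] at h2
          exact hoki h2
        · exact ⟨by omega, h2, h3⟩

lemma pvFoldAggB (g : List (List Int)) (bg : Int) (rn cn : Nat) (hcn : 0 < cn) (L : List Int)
    (hlab : ∀ {i v : Nat}, pvOkI g bg rn cn i → pvRepI g bg rn cn v i → L.getD i 0 = (v : Int)) :
    ∀ (k : Nat), k ≤ rn * cn →
    pvInvB g bg rn cn k
      ((List.range k).foldl (pvAgg (pvOkArr g bg (rn * cn) cn) L cn) PySem.Dict.empty) := by
  intro k
  induction k with
  | zero =>
    intro _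
    rw [List.range_zero, List.foldl_nil]
    refine ⟨[], ⟨List.Pairwise.nil, ?_⟩, ?_⟩
    · intro v
      constructor
      · intro hv
        exact absurd hv (List.not_mem_nil)
      · rintro ⟨h1, -, -⟩
        omega
    · have hempty : (PySem.Dict.empty : PySem.Dict Int (Int × Int × Int × Int)).items = [] := rfl
      rw [hempty]
      exact List.Forall₂.nil
  | succ k ih =>
    intro hk
    rw [List.range_succ, List.foldl_append, List.foldl_cons, List.foldl_nil]
    exact pvStepB g bg rn cn hcn L hlab k (by omega) _ (ih (by omega))

-- ===== the two dedup passes agree =====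
lemma pvDedup_join (g : List (List Int)) (bg : Int) (rn cn : Nat) :
    ∀ (ms : List Nat) (blobsA : List (List (String × Int)))
      (items : List (Int × (Int × Int × Int × Int))),
      List.Forall₂ (fun b v => ∃ mem, pvMemSpec g bg rn cn (rn * cn) v mem ∧
        b = pvBlobOfMem cn mem) blobsA ms →
      List.Forall₂ (fun (kv : Int × (Int × Int × Int × Int)) (v : Nat) =>
        kv.1 = (v : Int) ∧ ∃ mem, pvMemSpec g bg rn cn (rn * cn) v mem ∧
          kv.2 = (pvMinL (mem.map (pvRowI cn)), pvMaxL (mem.map (pvRowI cn)),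
                  pvMinL (mem.map (pvColI cn)), pvMaxL (mem.map (pvColI cn)))) items ms →
      ∀ (s : PySem.Set (Int × Int × Int × Int)) (u : List (List (String × Int))),
      (blobsA.foldl pvDedupStep (s, u)).2 =
        (items.foldl (fun su kv => pvDedupStepB su kv.2) (s, u)).2 := by
  intro ms
  induction ms with
  | nil =>
    intro blobsA items hA hB s u
    cases hA
    cases hB
    rfl
  | cons v ms ih =>
    intro blobsA items hA hB s u
    obtain ⟨b, blobsA', hb, hA', rfl⟩ := List.forall₂_cons_right_iff.1 hA
    obtain ⟨kv, items', hkv, hB', rfl⟩ := List.forall₂_cons_right_iff.1 hB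
    obtain ⟨memA, hmemA, rfl⟩ := hb
    obtain ⟨-, memB, hmemB, hkv2⟩ := hkv
    have hmm : ∀ x, x ∈ memA ↔ x ∈ memB := fun x => by rw [hmemA.2 x, hmemB.2 x]
    have honeA : memA.map (pvRowI cn) ≠ [] := by simp [hmemA.1]
    have honeB : memB.map (pvRowI cn) ≠ [] := by simp [hmemB.1]
    have honeAc : memA.map (pvColI cn) ≠ [] := by simp [hmemA.1]
    have honeBc : memB.map (pvColI cn) ≠ [] := by simp [hmemB.1]
    have hmapr : ∀ x, x ∈ memA.map (pvRowI cn) ↔ x ∈ memB.map (pvRowI cn) := by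
      intro x
      simp only [List.mem_map]
      exact ⟨fun ⟨j, hj, he⟩ => ⟨j, (hmm j).1 hj, he⟩, fun ⟨j, hj, he⟩ => ⟨j, (hmm j).2 hj, he⟩⟩
    have hmapc : ∀ x, x ∈ memA.map (pvColI cn) ↔ x ∈ memB.map (pvColI cn) := by
      intro x
      simp only [List.mem_map]
      exact ⟨fun ⟨j, hj, he⟩ => ⟨j, (hmm j).1 hj, he⟩, fun ⟨j, hj, he⟩ => ⟨j, (hmm j).2 hj, he⟩⟩
    have hbox : kv.2 = (pvMinL (memA.map (pvRowI cn)), pvMaxL (memA.map (pvRowI cn)),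
        pvMinL (memA.map (pvColI cn)), pvMaxL (memA.map (pvColI cn))) := by
      rw [hkv2, pvMinL_congr honeA honeB hmapr, pvMaxL_congr honeA honeB hmapr,
        pvMinL_congr honeAc honeBc hmapc, pvMaxL_congr honeAc honeBc hmapc]
    rw [List.foldl_cons, List.foldl_cons, hbox]
    have hstepa : pvDedupStep (s, u) (pvBlobOfMem cn memA) =
        if PySem.Set.contains s (pvMinL (memA.map (pvRowI cn)), pvMaxL (memA.map (pvRowI cn)),
            pvMinL (memA.map (pvColI cn)), pvMaxL (memA.map (pvColI cn))) then (s, u)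
        else (PySem.Set.add s (pvMinL (memA.map (pvRowI cn)), pvMaxL (memA.map (pvRowI cn)),
            pvMinL (memA.map (pvColI cn)), pvMaxL (memA.map (pvColI cn))),
          u ++ [pvBlobOfMem cn memA]) := rfl
    have hstepb : pvDedupStepB (s, u) (pvMinL (memA.map (pvRowI cn)), pvMaxL (memA.map (pvRowI cn)),
        pvMinL (memA.map (pvColI cn)), pvMaxL (memA.map (pvColI cn))) =
        if PySem.Set.contains s (pvMinL (memA.map (pvRowI cn)), pvMaxL (memA.map (pvRowI cn)),
            pvMinL (memA.map (pvColI cn)), pvMaxL (memA.map (pvColI cn))) then (s, u)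
        else (PySem.Set.add s (pvMinL (memA.map (pvRowI cn)), pvMaxL (memA.map (pvRowI cn)),
            pvMinL (memA.map (pvColI cn)), pvMaxL (memA.map (pvColI cn))),
          u ++ [pvBlobOfMem cn memA]) := rfl
    rw [hstepa, hstepb]
    split_ifs with hcont
    · exact ih blobsA' items' hA' hB' s u
    · exact ih blobsA' items' hA' hB' _ _

-- ===== VERDICT (by name: the statement is the Claim_ definition above) =====
theorem find_blobs_spec : Claim_equal_find_blobs := by
  intro grid _ hpre
  obtain ⟨hgne, hhne, -⟩ := hpre
  unfold Spec_find_blobs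
  have hrn0 : 0 < grid.length := List.length_pos_of_ne_nil hgne
  have hcn0 : 0 < grid.headI.length := List.length_pos_of_ne_nil hhne
  obtain ⟨-, -, msA, hmsA, hblobsA⟩ :=
    pvFoldRowsA grid (pvCell grid 0 0) grid.length grid.headI.length hcn0 grid.length (le_refl _)
  obtain ⟨msB, hmsB, hitemsB⟩ :=
    pvFoldAggB grid (pvCell grid 0 0) grid.length grid.headI.length hcn0 _
      (fun {i v} hok hrep =>
        pvLabels_final grid (pvCell grid 0 0) grid.length grid.headI.length hcn0 hok hrep)
      (grid.length * grid.headI.length) (le_refl _)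
  have hms_eq : msA = msB :=
    pvSortedLT_ext hmsA.1 hmsB.1 (fun v => by rw [hmsA.2 v, hmsB.2 v])
  rw [hms_eq] at hblobsA
  show find_blobs grid = find_blobs_alt grid
  simp only [find_blobs, find_blobs_alt, PySem.List.pyRange_zero_nat, List.foldl_map,
    PySem.Dict.values]
  exact pvDedup_join grid (pvCell grid 0 0) grid.length grid.headI.length msB _ _
    hblobsA hitemsB PySem.Set.empty []
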